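-- pv_equiv track=rewrite | github.com/kh277/BOJ | 백준/Platinum/3197. 백조의 호수/백조의 호수.py | solve
-- ===== SOURCE A (Python) =====
-- from collections import deque
--
-- dx = [-1, 1, 0, 0]
--
-- dy = [0, 0, -1, 1]
--
-- def solve(Y, X, grid):
--     # 백조의 초기 위치 저장
--     swan = []
--     for y in range(Y):
--         for x in range(X):
--             if grid[y][x] == 'L':
--                 swan.append((y, x))
--
--     visited = [[0] * X for _ in range(Y)]
--     swanQ = deque()
--     swanNextQ = deque()
--     waterQ = deque()
--     waterNextQ = deque()
--
--     # 백조와 물의 초기 위치 큐에 추가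
--     swanQ.append(swan[0])
--     visited[swan[0][0]][swan[0][1]] = 1
--     for y in range(Y):
--         for x in range(X):
--             if grid[y][x] != 'X':
--                 waterQ.append((y, x))
--
--     day = 0
--     while True:
--         # 백조 이동 BFS
--         while swanQ:
--             curY, curX = swanQ.popleft()
--
--             for i in range(4):
--                 nextX = curX + dx[i]
--                 nextY = curY + dy[i]
--                 if 0 <= nextX < X and 0 <= nextY < Y and visited[nextY][nextX] == 0:
--                     visited[nextY][nextX] = 1
--
--                     # 백조를 만난 경우
--                     if nextX == swan[1][1] and nextY == swan[1][0]:
--                         return day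
--                     # 다음날 이동 가능한 칸인 경우
--                     if grid[nextY][nextX] == 'X':
--                         swanNextQ.append((nextY, nextX))
--                     # 지금 이동 가능한 칸인 경우
--                     else:
--                         swanQ.append((nextY, nextX))
--
--         # 얼음 녹이기 BFS
--         while waterQ:
--             curY, curX = waterQ.popleft()
--
--             for i in range(4):
--                 nextX = curX + dx[i]
--                 nextY = curY + dy[i]
--                 if 0 <= nextX < X and 0 <= nextY < Y and grid[nextY][nextX] == 'X':
--                     grid[nextY][nextX] = '.'
--                     waterNextQ.append((nextY, nextX))
--
--         # 다음날 처리
--         swanQ = swanNextQ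
--         swanNextQ = deque()
--         waterQ = waterNextQ
--         waterNextQ = deque()
--         day += 1
-- ===== SOURCE B (Python) =====
-- def _neighbours(i, X, n):
--     nb = []
--     if i % X > 0:
--         nb.append(i - 1)
--     if i % X < X - 1:
--         nb.append(i + 1)
--     if i >= X:
--         nb.append(i - X)
--     if i + X < n:
--         nb.append(i + X)
--     return nb
--
--
-- def solve(Y, X, grid):
--     n = Y * X
--     # Phase 1: flat melt-day table via one multi-source layer BFS
--     # (water/swan cells melt on day 0, ice on the day it becomes water).
--     melt = [-1] * n
--     frontier = []
--     swans = []
--     for i in range(n):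
--         cell = grid[i // X][i % X]
--         if cell != 'X':
--             melt[i] = 0
--             frontier.append(i)
--         if cell == 'L':
--             swans.append(i)
--     d = 1
--     while frontier:
--         nxt = []
--         for i in frontier:
--             for j in _neighbours(i, X, n):
--                 if melt[j] == -1:
--                     melt[j] = d
--                     nxt.append(j)
--         frontier = nxt
--         d += 1
--     # Phase 2: day-stratified search over the static table: a cell is
--     # passable on day `day` iff 0 <= melt <= day.
--     s0, s1 = swans[0], swans[1]
--     seen = [False] * n
--     seen[s0] = True
--     q, nq = [s0], []
--     day = 0
--     while True:
--         k = 0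
--         while k < len(q):
--             i = q[k]
--             k += 1
--             for j in _neighbours(i, X, n):
--                 if not seen[j]:
--                     seen[j] = True
--                     if j == s1:
--                         return day
--                     if 0 <= melt[j] <= day:
--                         q.append(j)
--                     else:
--                         nq.append(j)
--         q, nq = nq, []
--         day += 1
-- ===== Notes on version B (the rewrite author's own statement) =====
-- stated objective: alternative
-- what changed: Replaces A's interleaved per-day water BFS that melts the 2-D grid in place with a single up-front multi-source melt-day BFS over a flat 1-D array indexed by y*X+x; the swan search then tests passability against that static flat table instead of the evolving grid (B does not mutate the caller's grid; equivalence is about the return value).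
import Mathlib
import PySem

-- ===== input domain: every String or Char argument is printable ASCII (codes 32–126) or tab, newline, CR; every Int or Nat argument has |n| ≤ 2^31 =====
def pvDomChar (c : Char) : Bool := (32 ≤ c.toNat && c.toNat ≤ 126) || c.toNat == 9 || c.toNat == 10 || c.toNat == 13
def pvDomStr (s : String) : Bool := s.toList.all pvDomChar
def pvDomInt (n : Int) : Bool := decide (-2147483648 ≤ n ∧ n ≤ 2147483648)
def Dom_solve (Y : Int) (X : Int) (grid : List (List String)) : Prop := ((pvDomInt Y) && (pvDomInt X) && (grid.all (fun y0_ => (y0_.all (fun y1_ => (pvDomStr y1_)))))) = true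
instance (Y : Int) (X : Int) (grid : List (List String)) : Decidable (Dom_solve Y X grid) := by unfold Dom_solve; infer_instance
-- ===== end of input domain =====

-- B replaces A's day-by-day water BFS (which melts the 2-D grid in place) by one up-front
-- multi-source melt-day BFS over a flat 1-D array indexed by y*X+x, consulted by the swan
-- search; A mutates the caller's grid, B does not — the equivalence proved here is about
-- the return value only.

-- ===== PORT A =====

def pvCell (grid : List (List String)) (y x : Int) : String :=
  PySem.List.pyGetD (PySem.List.pyGetD grid y []) x ""

def pvGSet (g : List (List String)) (y x : Int) (s : String) : List (List String) :=
  PySem.List.pySetD g y (PySem.List.pySetD (PySem.List.pyGetD g y []) x s)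

def pvDxA : List Int := [-1, 1, 0, 0]
def pvDyA : List Int := [0, 0, -1, 1]

-- swan = [(y,x) for y in range(Y) for x in range(X) if grid[y][x] == 'L']  (A's first scan)
def pvSwanScanA (Y X : Int) (grid : List (List String)) : List (Int × Int) :=
  (PySem.List.pyRange 0 Y 1).foldl (fun acc y =>
    (PySem.List.pyRange 0 X 1).foldl (fun acc x =>
      if pvCell grid y x = "L" then acc ++ [(y, x)] else acc) acc) []

-- waterQ initialisation (A's second scan: every non-'X' cell, row-major)
def pvWaterScanA (Y X : Int) (grid : List (List String)) : List (Int × Int) :=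
  (PySem.List.pyRange 0 Y 1).foldl (fun acc y =>
    (PySem.List.pyRange 0 X 1).foldl (fun acc x =>
      if pvCell grid y x ≠ "X" then acc ++ [(y, x)] else acc) acc) []

def pvVisited0 (Y X : Int) : List (List Int) :=
  (PySem.List.pyRange 0 Y 1).map (fun _ => List.replicate X.toNat 0)

def pvMGet (v : List (List Int)) (y x : Int) : Int :=
  PySem.List.pyGetD (PySem.List.pyGetD v y []) x 0

def pvMSet (v : List (List Int)) (y x : Int) (w : Int) : List (List Int) :=
  PySem.List.pySetD v y (PySem.List.pySetD (PySem.List.pyGetD v y []) x w)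

-- one step of the melting BFS: the inner `for i in range(4)` of A's water loop
def pvWaterNbA (Y X : Int) (c : Int × Int)
    (st : List (List String) × List (Int × Int)) (i : Int) :
    List (List String) × List (Int × Int) :=
  let nX := c.2 + PySem.List.pyGetD pvDxA i 0
  let nY := c.1 + PySem.List.pyGetD pvDyA i 0
  if 0 ≤ nX ∧ nX < X ∧ 0 ≤ nY ∧ nY < Y ∧ pvCell st.1 nY nX = "X" then
    (pvGSet st.1 nY nX ".", st.2 ++ [(nY, nX)])
  else st

-- A's water while-loop for one day (pops only from q, appends to waterNextQ)
def pvWaterA (Y X : Int) (g : List (List String)) (q next : List (Int × Int)) :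
    List (List String) × List (Int × Int) :=
  match q with
  | [] => (g, next)
  | c :: q' =>
    let st := (PySem.List.pyRange 0 4 1).foldl (pvWaterNbA Y X c) (g, next)
    pvWaterA Y X st.1 q' st.2

-- the inner `for i in range(4)` of A's swan loop; first component `some day` models the early return
def pvSwanNbA (Y X : Int) (g : List (List String)) (s1 : Int × Int) (day : Int) (c : Int × Int)
    (st : Option Int × List (List Int) × List (Int × Int) × List (Int × Int)) (i : Int) :
    Option Int × List (List Int) × List (Int × Int) × List (Int × Int) :=
  match st with
  | (some d, v, q, next) => (some d, v, q, next)
  | (none, v, q, next) =>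
    let nX := c.2 + PySem.List.pyGetD pvDxA i 0
    let nY := c.1 + PySem.List.pyGetD pvDyA i 0
    if 0 ≤ nX ∧ nX < X ∧ 0 ≤ nY ∧ nY < Y ∧ pvMGet v nY nX = 0 then
      let v' := pvMSet v nY nX 1
      if nX = s1.2 ∧ nY = s1.1 then (some day, v', q, next)
      else if pvCell g nY nX = "X" then (none, v', q, next ++ [(nY, nX)])
      else (none, v', q ++ [(nY, nX)], next)
    else (none, v, q, next)

-- A's swan while-loop for one day (queue may grow, hence fuel)
def pvSwanA (Y X : Int) (g : List (List String)) (s1 : Int × Int) (day : Int) :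
    Nat → List (List Int) → List (Int × Int) → List (Int × Int) →
    Option Int × List (List Int) × List (Int × Int)
  | 0, v, _, next => (none, v, next)
  | _ + 1, v, [], next => (none, v, next)
  | f + 1, v, c :: q', next =>
    match (PySem.List.pyRange 0 4 1).foldl (pvSwanNbA Y X g s1 day c) (none, v, q', next) with
    | (some d, v', _, next') => (some d, v', next')
    | (none, v', q'', next') => pvSwanA Y X g s1 day f v' q'' next'

-- A's `while True` day loop
def pvLoopA (Y X : Int) (s1 : Int × Int) :
    Nat → List (List String) → List (List Int) → List (Int × Int) → List (Int × Int) → Int → Int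
  | 0, _, _, _, _, _ => 0
  | f + 1, g, v, sq, wq, day =>
    match pvSwanA Y X g s1 day (sq.length + Y.toNat * X.toNat + 1) v sq [] with
    | (some d, _, _) => d
    | (none, v', snq) =>
      let w := pvWaterA Y X g wq []
      pvLoopA Y X s1 f w.1 v' snq w.2 (day + 1)

def solve (Y : Int) (X : Int) (grid : List (List String)) : Int :=
  match pvSwanScanA Y X grid with
  | s0 :: s1 :: _ =>
    pvLoopA Y X s1 (Y.toNat * X.toNat + 1)
      grid (pvMSet (pvVisited0 Y X) s0.1 s0.2 1) [s0] (pvWaterScanA Y X grid) 0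
  | _ => 0   -- fewer than two 'L' cells: the Python raises IndexError (or diverges); outside Pre_

-- ===== PORT B =====

-- Source B works over a flat 1-D array indexed by i = y*X + x (Nat indices; every index
-- Source B reads or writes is nonnegative and in range on every input admitted by Pre_).

-- _neighbours(i, X, n): left, right, up, down with boundary tests on i % X / i div X
def pvNbrs (X n i : Nat) : List Nat :=
  (if i % X > 0 then [i - 1] else []) ++
  (if i % X < X - 1 then [i + 1] else []) ++
  (if X ≤ i then [i - X] else []) ++
  (if i + X < n then [i + X] else [])

-- grid[i // X][i % X]  (exact on the in-range nonnegative indices Pre_ guarantees)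
def pvCellI (grid : List (List String)) (X i : Nat) : String :=
  (grid.getD (i / X) []).getD (i % X) ""

-- Source B's single scan over range(n): builds (melt with 0 at non-ice cells, frontier, swans)
def pvScanF (Y X : Int) (grid : List (List String)) : List Int × List Nat × List Nat :=
  (List.range (Y.toNat * X.toNat)).foldl (fun st i =>
    let cell := pvCellI grid X.toNat i
    let st1 := if cell ≠ "X" then (st.1.set i 0, st.2.1 ++ [i], st.2.2) else st
    if cell = "L" then (st1.1, st1.2.1, st1.2.2 ++ [i]) else st1)
    (List.replicate (Y.toNat * X.toNat) (-1), [], [])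

-- `if melt[j] == -1: melt[j] = d; nxt.append(j)`
def pvMeltStep (d : Int) (st : List Int × List Nat) (j : Nat) : List Int × List Nat :=
  if st.1.getD j 0 = -1 then (st.1.set j d, st.2 ++ [j]) else st

-- one `for i in frontier` pass of Source B's melt loop
def pvMeltLayer (X n : Nat) (d : Int) (melt : List Int) (fr : List Nat) :
    List Int × List Nat :=
  fr.foldl (fun st i => (pvNbrs X n i).foldl (pvMeltStep d) st) (melt, [])

-- Source B's `while frontier` loop (fuel: the frontier layers are finitely many)
def pvMeltRun (X n : Nat) : Nat → List Int → List Nat → Int → List Int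
  | 0, melt, _, _ => melt
  | _ + 1, melt, [], _ => melt
  | f + 1, melt, fr, d =>
    let st := pvMeltLayer X n d melt fr
    pvMeltRun X n f st.1 st.2 (d + 1)

-- the inner `for j in _neighbours(i, X, n)` body of Source B's swan loop
def pvSwanStep (melt : List Int) (s1 : Nat) (day : Int)
    (st : Option Int × List Bool × List Nat × List Nat) (j : Nat) :
    Option Int × List Bool × List Nat × List Nat :=
  match st with
  | (some d, sn, q, nq) => (some d, sn, q, nq)
  | (none, sn, q, nq) =>
    if sn.getD j false then (none, sn, q, nq)
    else
      let sn' := sn.set j true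
      if j = s1 then (some day, sn', q, nq)
      else if 0 ≤ melt.getD j 0 ∧ melt.getD j 0 ≤ day then (none, sn', q ++ [j], nq)
      else (none, sn', q, nq ++ [j])

-- Source B's cursor loop `while k < len(q)` for one day (the unread suffix of q is the state)
def pvSwanRun (X n : Nat) (melt : List Int) (s1 : Nat) (day : Int) :
    Nat → List Bool → List Nat → List Nat → Option Int × List Bool × List Nat
  | 0, sn, _, nq => (none, sn, nq)
  | _ + 1, sn, [], nq => (none, sn, nq)
  | f + 1, sn, i :: q, nq =>
    match (pvNbrs X n i).foldl (pvSwanStep melt s1 day) (none, sn, q, nq) with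
    | (some d, sn', _, nq') => (some d, sn', nq')
    | (none, sn', q', nq') => pvSwanRun X n melt s1 day f sn' q' nq'

-- Source B's `while True` day loop: only the static flat melt table is consulted
def pvDayLoop (X n : Nat) (melt : List Int) (s1 : Nat) :
    Nat → List Bool → List Nat → Int → Int
  | 0, _, _, _ => 0
  | f + 1, sn, q, day =>
    match pvSwanRun X n melt s1 day (q.length + n + 1) sn q [] with
    | (some d, _, _) => d
    | (none, sn', nq) => pvDayLoop X n melt s1 f sn' nq (day + 1)

def solve_alt (Y : Int) (X : Int) (grid : List (List String)) : Int :=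
  let n := Y.toNat * X.toNat
  let sc := pvScanF Y X grid
  let melt := pvMeltRun X.toNat n (n + 2) sc.1 sc.2.1 1
  -- s0, s1 = swans[0], swans[1]  (fewer than two 'L' cells raises IndexError; outside Pre_)
  let s0 := sc.2.2.getD 0 0
  let s1 := sc.2.2.getD 1 0
  pvDayLoop X.toNat n melt s1 (n + 1) ((List.replicate n false).set s0 true) [s0] 0

-- ===== PRECONDITION & SPEC =====

-- Pre_: exactly the inputs on which the Python A returns: at least one row/column, the first
-- Y rows all at least X wide (the initial scans index every cell of the Y×X window), and at
-- least two 'L' cells in the window (otherwise A raises IndexError at swan[0]/swan[1], or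
-- diverges on the single-cell lake).
def Pre_solve (Y : Int) (X : Int) (grid : List (List String)) : Prop :=
  1 ≤ Y ∧ 1 ≤ X ∧ Y ≤ (grid.length : Int) ∧
  (∀ r ∈ grid.take Y.toNat, X ≤ (r.length : Int)) ∧
  2 ≤ ((grid.take Y.toNat).map (fun r => (r.take X.toNat).count "L")).sum

instance (Y : Int) (X : Int) (grid : List (List String)) : Decidable (Pre_solve Y X grid) := by
  unfold Pre_solve; infer_instance

def pvWitness_solve : Int × Int × List (List String) := (1, 2, [["L", "L"]])

def Spec_solve (Y : Int) (X : Int) (grid : List (List String)) (out : Int) : Prop := out = solve_alt Y X grid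
instance (Y : Int) (X : Int) (grid : List (List String)) (out : Int) : Decidable (Spec_solve Y X grid out) := by unfold Spec_solve; infer_instance

-- ===== CLAIM (what is proved, stated in full; the proofs are below) =====
def Claim_equal_solve : Prop := ∀ (Y : Int) (X : Int) (grid : List (List String)), Dom_solve Y X grid → Pre_solve Y X grid → Spec_solve Y X grid (solve Y X grid)

-- ===== LEMMAS AND PROOFS =====

-- in-bounds cells
def pvInB (Y X : Int) (c : Int × Int) : Prop := 0 ≤ c.1 ∧ c.1 < Y ∧ 0 ≤ c.2 ∧ c.2 < X

-- grid shape: the Y×X window is addressable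
def pvGShape (Y X : Int) (g : List (List String)) : Prop :=
  Y.toNat ≤ g.length ∧ ∀ i : Nat, i < Y.toNat → X.toNat ≤ (g.getD i []).length

-- visited-matrix shape
def pvVShape (Y X : Int) (v : List (List Int)) : Prop :=
  v.length = Y.toNat ∧ ∀ i : Nat, i < Y.toNat → (v.getD i []).length = X.toNat

-- flat encoding of an in-bounds cell
def pvE (X : Int) (c : Int × Int) : Nat := c.1.toNat * X.toNat + c.2.toNat

-- ---- small indexing lemmas ----

theorem pvGetD_nonneg {α : Type} (xs : List α) (i : Int) (d : α) (h : 0 ≤ i) :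
    PySem.List.pyGetD xs i d = xs.getD i.toNat d := by
  have hi : i = (i.toNat : Int) := by omega
  rw [hi, PySem.List.pyGetD_natCast]
  have h2 : max i 0 = i := max_eq_left h
  simp [List.getD, h2]

theorem pvSetD_nonneg {α : Type} (xs : List α) (i : Int) (v : α) (h : 0 ≤ i) :
    PySem.List.pySetD xs i v = xs.set i.toNat v := PySem.List.pySetD_of_nonneg xs v h

theorem pvGetD_set {α : Type} (xs : List α) (n m : Nat) (v d : α) :
    (xs.set n v).getD m d = if m = n ∧ n < xs.length then v else xs.getD m d := by
  rcases Nat.lt_or_ge n xs.length with h|h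
  · by_cases e : m = n
    · subst e; simp [List.getD, h]
    · simp [List.getD, List.getElem?_set_ne (by omega : n ≠ m), e]
  · rw [List.set_eq_of_length_le (by omega)]
    have : ¬ (m = n ∧ n < xs.length) := by omega
    simp [this]

theorem pvMat_set_get {α : Type} (g : List (List α)) (y x y' x' : Int) (w d : α)
    (hy0 : 0 ≤ y) (hy : y.toNat < g.length) (hx0 : 0 ≤ x)
    (hx : x.toNat < (g.getD y.toNat []).length) (hy'0 : 0 ≤ y') (hx'0 : 0 ≤ x') :
    PySem.List.pyGetD (PySem.List.pyGetD
        (PySem.List.pySetD g y (PySem.List.pySetD (PySem.List.pyGetD g y []) x w)) y' []) x' d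
      = if y' = y ∧ x' = x then w
        else PySem.List.pyGetD (PySem.List.pyGetD g y' []) x' d := by
  rw [pvSetD_nonneg _ _ _ hy0, pvSetD_nonneg _ _ _ hx0,
      pvGetD_nonneg _ _ _ hy0, pvGetD_nonneg _ _ _ hy'0, pvGetD_nonneg _ _ _ hy'0,
      pvGetD_nonneg _ _ _ hx'0, pvGetD_nonneg _ _ _ hx'0, pvGetD_set]
  by_cases ey : y' = y
  · subst ey
    rw [if_pos ⟨rfl, hy⟩, pvGetD_set]
    by_cases ex : x' = x
    · subst ex
      rw [if_pos ⟨rfl, hx⟩, if_pos ⟨rfl, rfl⟩]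
    · have e2 : ¬ (x'.toNat = x.toNat ∧ x.toNat < (g.getD y'.toNat []).length) := by
        intro hc; exact ex (by omega)
      rw [if_neg e2, if_neg (by tauto)]
  · have e1 : ¬ (y'.toNat = y.toNat ∧ y.toNat < g.length) := by
      intro hc; exact ey (by omega)
    rw [if_neg e1, if_neg (by tauto)]

theorem pvCell_gset (g : List (List String)) (y x y' x' : Int) (s : String)
    (hy0 : 0 ≤ y) (hy : y.toNat < g.length) (hx0 : 0 ≤ x)
    (hx : x.toNat < (g.getD y.toNat []).length)
    (hy'0 : 0 ≤ y') (hx'0 : 0 ≤ x') :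
    pvCell (pvGSet g y x s) y' x' =
      if y' = y ∧ x' = x then s else pvCell g y' x' := by
  unfold pvCell pvGSet
  exact pvMat_set_get g y x y' x' s "" hy0 hy hx0 hx hy'0 hx'0

theorem pvMatShape {α : Type} (g : List (List α)) (y x : Int) (w : α)
    (hy0 : 0 ≤ y) (hx0 : 0 ≤ x) :
    (PySem.List.pySetD g y (PySem.List.pySetD (PySem.List.pyGetD g y []) x w)).length = g.length ∧
    ∀ i : Nat, ((PySem.List.pySetD g y
        (PySem.List.pySetD (PySem.List.pyGetD g y []) x w)).getD i []).length =
      (g.getD i []).length := by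
  rw [pvSetD_nonneg _ _ _ hy0, pvSetD_nonneg _ _ _ hx0, pvGetD_nonneg _ _ _ hy0]
  constructor
  · simp
  · intro i
    rw [pvGetD_set]
    by_cases e : i = y.toNat ∧ y.toNat < g.length
    · rw [if_pos e, e.1]
      simp [e.2]
    · rw [if_neg e]

theorem pvGShape_gset (Y X : Int) (g : List (List String)) (y x : Int) (s : String)
    (hy0 : 0 ≤ y) (hx0 : 0 ≤ x)
    (h : pvGShape Y X g) : pvGShape Y X (pvGSet g y x s) := by
  obtain ⟨hl, hr⟩ := pvMatShape g y x s hy0 hx0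
  exact ⟨by rw [pvGSet, hl]; exact h.1, fun i hi => by rw [pvGSet, hr]; exact h.2 i hi⟩

theorem pvMGet_mset (v : List (List Int)) (y x y' x' w : Int)
    (hy0 : 0 ≤ y) (hy : y.toNat < v.length) (hx0 : 0 ≤ x)
    (hx : x.toNat < (v.getD y.toNat []).length)
    (hy'0 : 0 ≤ y') (hx'0 : 0 ≤ x') :
    pvMGet (pvMSet v y x w) y' x' =
      if y' = y ∧ x' = x then w else pvMGet v y' x' := by
  unfold pvMGet pvMSet
  exact pvMat_set_get v y x y' x' w 0 hy0 hy hx0 hx hy'0 hx'0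

theorem pvVShape_mset (Y X : Int) (v : List (List Int)) (y x w : Int)
    (hy0 : 0 ≤ y) (hx0 : 0 ≤ x)
    (h : pvVShape Y X v) : pvVShape Y X (pvMSet v y x w) := by
  obtain ⟨hl, hr⟩ := pvMatShape v y x w hy0 hx0
  exact ⟨by rw [pvMSet, hl]; exact h.1, fun i hi => by rw [pvMSet, hr]; exact h.2 i hi⟩

-- ---- flat-encoding arithmetic ----

theorem pvFlatLt (y x a b : Nat) (hy : y < a) (hx : x < b) : y * b + x < a * b := by
  have h1 : y + 1 ≤ a := hy
  have h2 : (y + 1) * b ≤ a * b := Nat.mul_le_mul_right b h1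
  have h3 : y * b + x < y * b + b := by omega
  calc y * b + x < (y + 1) * b := by rw [Nat.succ_mul]; omega
    _ ≤ a * b := h2

theorem pvE_mod (X : Int) (c : Int × Int) (hx : c.2.toNat < X.toNat) :
    pvE X c % X.toNat = c.2.toNat := by
  unfold pvE
  rw [Nat.add_comm, Nat.add_mul_mod_self_right]
  exact Nat.mod_eq_of_lt hx

theorem pvE_div (X : Int) (c : Int × Int) (hX : 0 < X.toNat) (hx : c.2.toNat < X.toNat) :
    pvE X c / X.toNat = c.1.toNat := by
  unfold pvE
  rw [Nat.mul_comm, Nat.mul_add_div hX, Nat.div_eq_of_lt hx]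
  omega

theorem pvE_lt (Y X : Int) (c : Int × Int) (h : pvInB Y X c) :
    pvE X c < Y.toNat * X.toNat := by
  obtain ⟨h1, h2, h3, h4⟩ := h
  exact pvFlatLt _ _ _ _ (by omega) (by omega)

theorem pvE_inj (Y X : Int) (c c' : Int × Int) (h : pvInB Y X c) (h' : pvInB Y X c')
    (he : pvE X c = pvE X c') : c = c' := by
  obtain ⟨h1, h2, h3, h4⟩ := h
  obtain ⟨h1', h2', h3', h4'⟩ := h'
  have hX : 0 < X.toNat := by omega
  have hm := pvE_mod X c (by omega)
  have hm' := pvE_mod X c' (by omega)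
  have hd := pvE_div X c hX (by omega)
  have hd' := pvE_div X c' hX (by omega)
  have e2 : c.2 = c'.2 := by rw [he] at hm; omega
  have e1 : c.1 = c'.1 := by rw [he] at hd; omega
  exact Prod.ext e1 e2

-- the four directions, in A's traversal order (left, right, up, down)
def pvDeltas : List (Int × Int) := [(0, -1), (0, 1), (-1, 0), (1, 0)]

-- A's in-bounds test for the target of a step
def pvBnd (Y X : Int) (c dd : Int × Int) : Prop :=
  0 ≤ c.2 + dd.2 ∧ c.2 + dd.2 < X ∧ 0 ≤ c.1 + dd.1 ∧ c.1 + dd.1 < Y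

-- direction lemmas: A's bounds test ⟷ Source B's flat boundary test, and the flat target index
theorem pvDirL (Y X : Int) (c : Int × Int) (h : pvInB Y X c) :
    (pvBnd Y X c (0, -1) ↔ pvE X c % X.toNat > 0) ∧
    (pvBnd Y X c (0, -1) → pvE X (c.1 + 0, c.2 + -1) = pvE X c - 1) := by
  obtain ⟨h1, h2, h3, h4⟩ := h
  have hm := pvE_mod X c (by omega)
  constructor
  · unfold pvBnd; simp only []; omega
  · intro hb
    obtain ⟨b1, b2, b3, b4⟩ := hb
    unfold pvE
    simp only []
    rw [show (c.1 + 0).toNat = c.1.toNat from by omega]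
    omega

theorem pvDirR (Y X : Int) (c : Int × Int) (h : pvInB Y X c) :
    (pvBnd Y X c (0, 1) ↔ pvE X c % X.toNat < X.toNat - 1) ∧
    (pvBnd Y X c (0, 1) → pvE X (c.1 + 0, c.2 + 1) = pvE X c + 1) := by
  obtain ⟨h1, h2, h3, h4⟩ := h
  have hm := pvE_mod X c (by omega)
  constructor
  · unfold pvBnd; simp only []; omega
  · intro hb
    obtain ⟨b1, b2, b3, b4⟩ := hb
    unfold pvE
    simp only []
    rw [show (c.1 + 0).toNat = c.1.toNat from by omega]
    omega

theorem pvDirU (Y X : Int) (c : Int × Int) (h : pvInB Y X c) :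
    (pvBnd Y X c (-1, 0) ↔ X.toNat ≤ pvE X c) ∧
    (pvBnd Y X c (-1, 0) → pvE X (c.1 + -1, c.2 + 0) = pvE X c - X.toNat) := by
  obtain ⟨h1, h2, h3, h4⟩ := h
  have hiff : pvBnd Y X c (-1, 0) ↔ 1 ≤ c.1 := by
    unfold pvBnd; simp only []; omega
  constructor
  · rw [hiff]
    unfold pvE
    constructor
    · intro hy
      have : 1 * X.toNat ≤ c.1.toNat * X.toNat := Nat.mul_le_mul_right _ (by omega)
      omega
    · intro hge
      by_contra hy
      have hc1 : c.1.toNat = 0 := by omega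
      rw [hc1] at hge
      simp at hge
      omega
  · intro hb
    have hy : 1 ≤ c.1 := hiff.1 hb
    unfold pvE
    simp only []
    have : (c.1 + -1).toNat = c.1.toNat - 1 := by omega
    rw [this, show (c.2 + 0).toNat = c.2.toNat from by omega]
    have h5 : 1 ≤ c.1.toNat := by omega
    have : (c.1.toNat - 1) * X.toNat = c.1.toNat * X.toNat - X.toNat := by
      rw [Nat.sub_mul, Nat.one_mul]
    rw [this]
    have : X.toNat ≤ c.1.toNat * X.toNat := by
      calc X.toNat = 1 * X.toNat := (Nat.one_mul _).symm
        _ ≤ c.1.toNat * X.toNat := Nat.mul_le_mul_right _ h5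
    omega

theorem pvDirD (Y X : Int) (c : Int × Int) (h : pvInB Y X c) :
    (pvBnd Y X c (1, 0) ↔ pvE X c + X.toNat < Y.toNat * X.toNat) ∧
    (pvBnd Y X c (1, 0) → pvE X (c.1 + 1, c.2 + 0) = pvE X c + X.toNat) := by
  obtain ⟨h1, h2, h3, h4⟩ := h
  have hiff : pvBnd Y X c (1, 0) ↔ c.1 + 1 < Y := by
    unfold pvBnd; simp only []; omega
  have henc : pvE X (c.1 + 1, c.2 + 0) = pvE X c + X.toNat := by
    unfold pvE
    simp only []
    rw [show (c.1 + 1).toNat = c.1.toNat + 1 from by omega,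
        show (c.2 + 0).toNat = c.2.toNat from by omega, Nat.succ_mul]
    omega
  constructor
  · rw [hiff]
    constructor
    · intro hy
      have := pvFlatLt (c.1.toNat + 1) c.2.toNat Y.toNat X.toNat (by omega) (by omega)
      unfold pvE
      rw [Nat.succ_mul] at this
      omega
    · intro hlt
      by_contra hy
      have hYle : Y.toNat ≤ c.1.toNat + 1 := by omega
      have : Y.toNat * X.toNat ≤ (c.1.toNat + 1) * X.toNat := Nat.mul_le_mul_right _ hYle
      rw [Nat.succ_mul] at this
      unfold pvE at hlt
      omega
  · intro _; exact henc


-- ---- A's inner range(4) folds rewritten over the explicit direction list ----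

def pvStepA (Y X : Int) (c : Int × Int) (st : List (List String) × List (Int × Int))
    (dd : Int × Int) : List (List String) × List (Int × Int) :=
  if 0 ≤ c.2 + dd.2 ∧ c.2 + dd.2 < X ∧ 0 ≤ c.1 + dd.1 ∧ c.1 + dd.1 < Y ∧
      pvCell st.1 (c.1 + dd.1) (c.2 + dd.2) = "X" then
    (pvGSet st.1 (c.1 + dd.1) (c.2 + dd.2) ".", st.2 ++ [(c.1 + dd.1, c.2 + dd.2)])
  else st

theorem pvWaterA_fold_eq (Y X : Int) (c : Int × Int)
    (st : List (List String) × List (Int × Int)) :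
    (PySem.List.pyRange 0 4 1).foldl (pvWaterNbA Y X c) st
      = pvDeltas.foldl (pvStepA Y X c) st := by
  have h4 : PySem.List.pyRange 0 4 1 = [0, 1, 2, 3] := by decide
  have e0 : ∀ st, pvWaterNbA Y X c st 0 = pvStepA Y X c st (0, -1) := by
    intro st
    dsimp only [pvWaterNbA, pvStepA]
    rw [show PySem.List.pyGetD pvDxA 0 0 = -1 from by decide,
        show PySem.List.pyGetD pvDyA 0 0 = 0 from by decide]
  have e1 : ∀ st, pvWaterNbA Y X c st 1 = pvStepA Y X c st (0, 1) := by
    intro st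
    dsimp only [pvWaterNbA, pvStepA]
    rw [show PySem.List.pyGetD pvDxA 1 0 = 1 from by decide,
        show PySem.List.pyGetD pvDyA 1 0 = 0 from by decide]
  have e2 : ∀ st, pvWaterNbA Y X c st 2 = pvStepA Y X c st (-1, 0) := by
    intro st
    dsimp only [pvWaterNbA, pvStepA]
    rw [show PySem.List.pyGetD pvDxA 2 0 = 0 from by decide,
        show PySem.List.pyGetD pvDyA 2 0 = -1 from by decide]
  have e3 : ∀ st, pvWaterNbA Y X c st 3 = pvStepA Y X c st (1, 0) := by
    intro st
    dsimp only [pvWaterNbA, pvStepA]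
    rw [show PySem.List.pyGetD pvDxA 3 0 = 0 from by decide,
        show PySem.List.pyGetD pvDyA 3 0 = 1 from by decide]
  rw [h4]
  simp only [pvDeltas, List.foldl_cons, List.foldl_nil, e0, e1, e2, e3]

-- folding over one optional singleton of pvNbrs
theorem pvFoldlOpt {α : Type} (f : α → Nat → α) (cond : Prop) [Decidable cond] (j : Nat)
    (st : α) : (if cond then [j] else []).foldl f st = if cond then f st j else st := by
  split_ifs <;> simp

-- ---- coupling of A's melting pass with B's melt layer ----

def pvRelM (Y X : Int) (stA : List (List String) × List (Int × Int))
    (stB : List Int × List Nat) : Prop :=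
  pvGShape Y X stA.1 ∧ stB.1.length = Y.toNat * X.toNat ∧
  (∀ c, pvInB Y X c → (pvCell stA.1 c.1 c.2 = "X" ↔ stB.1.getD (pvE X c) 0 = -1)) ∧
  stB.2 = stA.2.map (pvE X) ∧ (∀ a ∈ stA.2, pvInB Y X a)

theorem pvMeltDirStep (Y X d : Int) (hd : 1 ≤ d) (c : Int × Int) (hc : pvInB Y X c)
    (dd : Int × Int) (cond : Prop) [Decidable cond] (j : Nat)
    (hiff : pvBnd Y X c dd ↔ cond)
    (henc : pvBnd Y X c dd → pvE X (c.1 + dd.1, c.2 + dd.2) = j)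
    (stA : List (List String) × List (Int × Int)) (stB : List Int × List Nat)
    (hr : pvRelM Y X stA stB) :
    pvRelM Y X (pvStepA Y X c stA dd) (if cond then pvMeltStep d stB j else stB) := by
  obtain ⟨hs, hlen, hC, hq, hqb⟩ := hr
  by_cases hb : pvBnd Y X c dd
  · rw [if_pos (hiff.1 hb)]
    obtain ⟨b1, b2, b3, b4⟩ := hb
    have ht : pvInB Y X (c.1 + dd.1, c.2 + dd.2) := ⟨b3, b4, b1, b2⟩
    have hj : pvE X (c.1 + dd.1, c.2 + dd.2) = j := henc ⟨b1, b2, b3, b4⟩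
    have hjn : j < Y.toNat * X.toNat := by rw [← hj]; exact pvE_lt Y X _ ht
    have hcc := hC _ ht
    simp only at hcc
    rw [hj] at hcc
    dsimp only [pvStepA, pvMeltStep]
    by_cases hx : pvCell stA.1 (c.1 + dd.1) (c.2 + dd.2) = "X"
    · rw [if_pos ⟨b1, b2, b3, b4, hx⟩, if_pos (hcc.1 hx)]
      have hyb : (c.1 + dd.1).toNat < stA.1.length := by have := hs.1; omega
      have hxb : (c.2 + dd.2).toNat < (stA.1.getD (c.1 + dd.1).toNat []).length := by
        have := hs.2 (c.1 + dd.1).toNat (by omega); omega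
      refine ⟨pvGShape_gset Y X stA.1 _ _ _ b3 b1 hs, by simp [hlen], ?_, ?_, ?_⟩
      · intro c' hc'
        rw [pvCell_gset stA.1 (c.1 + dd.1) (c.2 + dd.2) c'.1 c'.2 "." b3 hyb b1 hxb
            hc'.1 hc'.2.2.1, pvGetD_set]
        by_cases e : c' = (c.1 + dd.1, c.2 + dd.2)
        · have e2 : c'.1 = c.1 + dd.1 ∧ c'.2 = c.2 + dd.2 := by rw [e]; exact ⟨rfl, rfl⟩
          have ej : pvE X c' = j := by rw [e, hj]
          rw [if_pos e2, if_pos ⟨ej, by rw [hlen]; exact hjn⟩]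
          constructor
          · intro hdot; exact absurd hdot (by decide)
          · intro hcontra; omega
        · have e2 : ¬ (c'.1 = c.1 + dd.1 ∧ c'.2 = c.2 + dd.2) := by
            intro hcon; exact e (Prod.ext hcon.1 hcon.2)
          have ej : ¬ (pvE X c' = j) := by
            intro hcon
            exact e (pvE_inj Y X c' _ hc' ht (by rw [hcon, hj]))
          rw [if_neg e2, if_neg (by tauto)]
          exact hC c' hc'
      · simp [hq, hj]
      · intro a ha
        rcases List.mem_append.1 ha with h | h
        · exact hqb a h
        · rw [List.mem_singleton.1 h]; exact ht
    · rw [if_neg (by tauto), if_neg (by rw [← hcc] at *; tauto)]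
      exact ⟨hs, hlen, hC, hq, hqb⟩
  · rw [if_neg (fun hcon => hb (hiff.2 hcon))]
    dsimp only [pvStepA]
    rw [if_neg (by unfold pvBnd at hb; tauto)]
    exact ⟨hs, hlen, hC, hq, hqb⟩

theorem pvMeltCell (Y X d : Int) (hd : 1 ≤ d) (c : Int × Int) (hc : pvInB Y X c)
    (stA : List (List String) × List (Int × Int)) (stB : List Int × List Nat)
    (hr : pvRelM Y X stA stB) :
    pvRelM Y X (pvDeltas.foldl (pvStepA Y X c) stA)
      ((pvNbrs X.toNat (Y.toNat * X.toNat) (pvE X c)).foldl (pvMeltStep d) stB) := by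
  have hA : pvDeltas.foldl (pvStepA Y X c) stA
      = pvStepA Y X c (pvStepA Y X c (pvStepA Y X c (pvStepA Y X c stA (0, -1)) (0, 1))
          (-1, 0)) (1, 0) := by
    simp only [pvDeltas, List.foldl_cons, List.foldl_nil]
  rw [hA]
  unfold pvNbrs
  rw [List.foldl_append, List.foldl_append, List.foldl_append,
      pvFoldlOpt, pvFoldlOpt, pvFoldlOpt, pvFoldlOpt]
  have s1 := pvMeltDirStep Y X d hd c hc (0, -1) _ _ (pvDirL Y X c hc).1 (pvDirL Y X c hc).2
    stA stB hr
  have s2 := pvMeltDirStep Y X d hd c hc (0, 1) _ _ (pvDirR Y X c hc).1 (pvDirR Y X c hc).2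
    _ _ s1
  have s3 := pvMeltDirStep Y X d hd c hc (-1, 0) _ _ (pvDirU Y X c hc).1 (pvDirU Y X c hc).2
    _ _ s2
  have s4 := pvMeltDirStep Y X d hd c hc (1, 0) _ _ (pvDirD Y X c hc).1 (pvDirD Y X c hc).2
    _ _ s3
  exact s4

theorem pvWater_layer_rel (Y X d : Int) (hd : 1 ≤ d) (qA : List (Int × Int)) :
    ∀ (g : List (List String)) (accA : List (Int × Int)) (stB : List Int × List Nat),
    pvRelM Y X (g, accA) stB → (∀ a ∈ qA, pvInB Y X a) →
    pvRelM Y X (pvWaterA Y X g qA accA)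
      (qA.foldl (fun st c =>
        (pvNbrs X.toNat (Y.toNat * X.toNat) (pvE X c)).foldl (pvMeltStep d) st) stB) := by
  induction qA with
  | nil => intro g accA stB hr _; exact hr
  | cons c q' ih =>
    intro g accA stB hr hq
    rw [pvWaterA]
    simp only [List.foldl_cons]
    rw [pvWaterA_fold_eq]
    have hstep := pvMeltCell Y X d hd c (hq c List.mem_cons_self) (g, accA) stB hr
    have := ih (pvDeltas.foldl (pvStepA Y X c) (g, accA)).1
      (pvDeltas.foldl (pvStepA Y X c) (g, accA)).2
      ((pvNbrs X.toNat (Y.toNat * X.toNat) (pvE X c)).foldl (pvMeltStep d) stB)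
      (by rw [Prod.mk.eta]; exact hstep)
      (fun a ha => hq a (List.mem_cons_of_mem _ ha))
    rw [← Prod.mk.eta (p := pvDeltas.foldl (pvStepA Y X c) (g, accA))]
    exact this

-- ---- pvMeltRun bookkeeping ----

theorem pvMeltStep_mono (d : Int) (st : List Int × List Nat) (j k : Nat)
    (h : st.1.getD k 0 ≠ -1) :
    (pvMeltStep d st j).1.getD k 0 = st.1.getD k 0 := by
  unfold pvMeltStep
  split
  · next hg =>
    simp only []
    rw [pvGetD_set]
    split_ifs with he
    · rw [he.1] at h; exact absurd hg h
    · rfl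
  · rfl

theorem pvMeltStep_new (d : Int) (st : List Int × List Nat) (j k : Nat) :
    (pvMeltStep d st j).1.getD k 0 = st.1.getD k 0 ∨ (pvMeltStep d st j).1.getD k 0 = d := by
  unfold pvMeltStep
  split
  · simp only []
    rw [pvGetD_set]
    split_ifs
    · exact Or.inr rfl
    · exact Or.inl rfl
  · exact Or.inl rfl

theorem pvFold_meltStep_mono (d : Int) (js : List Nat) :
    ∀ (st : List Int × List Nat) (k : Nat), st.1.getD k 0 ≠ -1 →
    (js.foldl (pvMeltStep d) st).1.getD k 0 = st.1.getD k 0 := by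
  induction js with
  | nil => intro st k _; rfl
  | cons j js ih =>
    intro st k h
    simp only [List.foldl_cons]
    rw [ih _ k (by rw [pvMeltStep_mono d st j k h]; exact h)]
    exact pvMeltStep_mono d st j k h

theorem pvFold_meltStep_new (d : Int) (js : List Nat) :
    ∀ (st : List Int × List Nat) (k : Nat),
    (js.foldl (pvMeltStep d) st).1.getD k 0 = st.1.getD k 0 ∨
    (js.foldl (pvMeltStep d) st).1.getD k 0 = d := by
  induction js with
  | nil => intro st k; exact Or.inl rfl
  | cons j js ih =>
    intro st k
    simp only [List.foldl_cons]
    rcases ih (pvMeltStep d st j) k with h | h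
    · rw [h]; exact pvMeltStep_new d st j k
    · exact Or.inr h

theorem pvLayerFold_mono (d : Int) (fr : List Nat) (X' n : Nat) :
    ∀ (st : List Int × List Nat) (k : Nat), st.1.getD k 0 ≠ -1 →
    (fr.foldl (fun st i => (pvNbrs X' n i).foldl (pvMeltStep d) st) st).1.getD k 0
      = st.1.getD k 0 := by
  induction fr with
  | nil => intro st k _; rfl
  | cons i fr ih =>
    intro st k h
    simp only [List.foldl_cons]
    rw [ih _ k (by rw [pvFold_meltStep_mono d _ st k h]; exact h),
        pvFold_meltStep_mono d _ st k h]

theorem pvLayerFold_new (d : Int) (fr : List Nat) (X' n : Nat) :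
    ∀ (st : List Int × List Nat) (k : Nat),
    (fr.foldl (fun st i => (pvNbrs X' n i).foldl (pvMeltStep d) st) st).1.getD k 0
      = st.1.getD k 0 ∨
    (fr.foldl (fun st i => (pvNbrs X' n i).foldl (pvMeltStep d) st) st).1.getD k 0 = d := by
  induction fr with
  | nil => intro st k; exact Or.inl rfl
  | cons i fr ih =>
    intro st k
    simp only [List.foldl_cons]
    rcases ih ((pvNbrs X' n i).foldl (pvMeltStep d) st) k with h | h
    · rw [h]; exact pvFold_meltStep_new d _ st k
    · exact Or.inr h

theorem pvMeltLayer_mono (X' n : Nat) (d : Int) (pm : List Int) (fr : List Nat) (k : Nat)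
    (h : pm.getD k 0 ≠ -1) : (pvMeltLayer X' n d pm fr).1.getD k 0 = pm.getD k 0 :=
  pvLayerFold_mono d fr X' n (pm, []) k h

theorem pvMeltLayer_new (X' n : Nat) (d : Int) (pm : List Int) (fr : List Nat) (k : Nat) :
    (pvMeltLayer X' n d pm fr).1.getD k 0 = pm.getD k 0 ∨
    (pvMeltLayer X' n d pm fr).1.getD k 0 = d :=
  pvLayerFold_new d fr X' n (pm, []) k

theorem pvMeltRun_nil (X' n : Nat) (f : Nat) (pm : List Int) (d : Int) :
    pvMeltRun X' n f pm [] d = pm := by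
  cases f <;> rfl

theorem pvMeltRun_step (X' n : Nat) (f : Nat) (pm : List Int) (fr : List Nat) (d : Int) :
    pvMeltRun X' n (f + 1) pm fr d
      = pvMeltRun X' n f (pvMeltLayer X' n d pm fr).1 (pvMeltLayer X' n d pm fr).2 (d + 1) := by
  match fr with
  | [] =>
    rw [pvMeltRun_nil]
    have : pvMeltLayer X' n d pm [] = (pm, []) := rfl
    rw [this, pvMeltRun_nil]
  | a :: fr' => rfl

theorem pvMeltRun_mono (X' n : Nat) (f : Nat) :
    ∀ (pm : List Int) (fr : List Nat) (d : Int) (k : Nat), pm.getD k 0 ≠ -1 →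
    (pvMeltRun X' n f pm fr d).getD k 0 = pm.getD k 0 := by
  induction f with
  | zero => intro pm fr d k _; rfl
  | succ f ih =>
    intro pm fr d k h
    rw [pvMeltRun_step]
    rw [ih _ _ _ k (by rw [pvMeltLayer_mono X' n d pm fr k h]; exact h)]
    exact pvMeltLayer_mono X' n d pm fr k h

theorem pvMeltRun_new (X' n : Nat) (f : Nat) :
    ∀ (pm : List Int) (fr : List Nat) (d : Int) (k : Nat),
    (pvMeltRun X' n f pm fr d).getD k 0 = pm.getD k 0 ∨
    d ≤ (pvMeltRun X' n f pm fr d).getD k 0 := by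
  induction f with
  | zero => intro pm fr d k; exact Or.inl rfl
  | succ f ih =>
    intro pm fr d k
    rw [pvMeltRun_step]
    rcases ih (pvMeltLayer X' n d pm fr).1 (pvMeltLayer X' n d pm fr).2 (d + 1) k with h | h
    · rw [h]
      rcases pvMeltLayer_new X' n d pm fr k with h2 | h2
      · exact Or.inl h2
      · exact Or.inr (by omega)
    · exact Or.inr (by omega)


-- ---- swan phase lockstep ----

-- A's swan step over the (dy,dx) pair it actually uses
def pvSStepA (Y X : Int) (g : List (List String)) (s1 : Int × Int) (day : Int) (c : Int × Int)
    (st : Option Int × List (List Int) × List (Int × Int) × List (Int × Int))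
    (dd : Int × Int) :
    Option Int × List (List Int) × List (Int × Int) × List (Int × Int) :=
  match st with
  | (some d, v, q, next) => (some d, v, q, next)
  | (none, v, q, next) =>
    let nX := c.2 + dd.2
    let nY := c.1 + dd.1
    if 0 ≤ nX ∧ nX < X ∧ 0 ≤ nY ∧ nY < Y ∧ pvMGet v nY nX = 0 then
      let v' := pvMSet v nY nX 1
      if nX = s1.2 ∧ nY = s1.1 then (some day, v', q, next)
      else if pvCell g nY nX = "X" then (none, v', q, next ++ [(nY, nX)])
      else (none, v', q ++ [(nY, nX)], next)
    else (none, v, q, next)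

theorem pvSwanNbA_fold_eq (Y X : Int) (g : List (List String)) (s1 : Int × Int) (day : Int)
    (c : Int × Int) (st : Option Int × List (List Int) × List (Int × Int) × List (Int × Int)) :
    (PySem.List.pyRange 0 4 1).foldl (pvSwanNbA Y X g s1 day c) st
      = pvDeltas.foldl (pvSStepA Y X g s1 day c) st := by
  have h4 : PySem.List.pyRange 0 4 1 = [0, 1, 2, 3] := by decide
  have e0 : ∀ st, pvSwanNbA Y X g s1 day c st 0 = pvSStepA Y X g s1 day c st (0, -1) := by
    intro st
    dsimp only [pvSwanNbA, pvSStepA]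
    rw [show PySem.List.pyGetD pvDxA 0 0 = -1 from by decide,
        show PySem.List.pyGetD pvDyA 0 0 = 0 from by decide]
  have e1 : ∀ st, pvSwanNbA Y X g s1 day c st 1 = pvSStepA Y X g s1 day c st (0, 1) := by
    intro st
    dsimp only [pvSwanNbA, pvSStepA]
    rw [show PySem.List.pyGetD pvDxA 1 0 = 1 from by decide,
        show PySem.List.pyGetD pvDyA 1 0 = 0 from by decide]
  have e2 : ∀ st, pvSwanNbA Y X g s1 day c st 2 = pvSStepA Y X g s1 day c st (-1, 0) := by
    intro st
    dsimp only [pvSwanNbA, pvSStepA]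
    rw [show PySem.List.pyGetD pvDxA 2 0 = 0 from by decide,
        show PySem.List.pyGetD pvDyA 2 0 = -1 from by decide]
  have e3 : ∀ st, pvSwanNbA Y X g s1 day c st 3 = pvSStepA Y X g s1 day c st (1, 0) := by
    intro st
    dsimp only [pvSwanNbA, pvSStepA]
    rw [show PySem.List.pyGetD pvDxA 3 0 = 0 from by decide,
        show PySem.List.pyGetD pvDyA 3 0 = 1 from by decide]
  rw [h4]
  simp only [pvDeltas, List.foldl_cons, List.foldl_nil, e0, e1, e2, e3]

-- coupling of A's and B's swan-BFS states
def pvRelS (Y X : Int)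
    (stA : Option Int × List (List Int) × List (Int × Int) × List (Int × Int))
    (stB : Option Int × List Bool × List Nat × List Nat) : Prop :=
  stA.1 = stB.1 ∧ pvVShape Y X stA.2.1 ∧ stB.2.1.length = Y.toNat * X.toNat ∧
  (∀ c, pvInB Y X c →
    pvMGet stA.2.1 c.1 c.2 = (if stB.2.1.getD (pvE X c) false then 1 else 0)) ∧
  stB.2.2.1 = stA.2.2.1.map (pvE X) ∧ stB.2.2.2 = stA.2.2.2.map (pvE X) ∧
  (∀ a ∈ stA.2.2.1, pvInB Y X a) ∧ (∀ a ∈ stA.2.2.2, pvInB Y X a)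

-- the per-day passability agreement between A's grid and B's flat melt table
def pvTest (Y X : Int) (g : List (List String)) (M : List Int) (day : Int) : Prop :=
  ∀ c, pvInB Y X c →
    (pvCell g c.1 c.2 = "X" ↔ ¬ (0 ≤ M.getD (pvE X c) 0 ∧ M.getD (pvE X c) 0 ≤ day))

theorem pvSwanDirStep (Y X : Int) (g : List (List String)) (M : List Int) (day : Int)
    (ht : pvTest Y X g M day) (s1 : Int × Int) (hs1 : pvInB Y X s1)
    (c : Int × Int) (hc : pvInB Y X c)
    (dd : Int × Int) (cond : Prop) [Decidable cond] (j : Nat)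
    (hiff : pvBnd Y X c dd ↔ cond)
    (henc : pvBnd Y X c dd → pvE X (c.1 + dd.1, c.2 + dd.2) = j)
    (stA : Option Int × List (List Int) × List (Int × Int) × List (Int × Int))
    (stB : Option Int × List Bool × List Nat × List Nat)
    (hr : pvRelS Y X stA stB) :
    pvRelS Y X (pvSStepA Y X g s1 day c stA dd)
      (if cond then pvSwanStep M (pvE X s1) day stB j else stB) := by
  obtain ⟨ro, v, q, nq⟩ := stA
  obtain ⟨ro2, sn, qb, nqb⟩ := stB
  obtain ⟨h1, h2, h3, h4, h5, h6, h7, h8⟩ := hr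
  simp only at h1 h2 h3 h4 h5 h6 h7 h8
  subst h1; subst h5; subst h6
  cases ro with
  | some d =>
    have hB : pvSwanStep M (pvE X s1) day (some d, sn, q.map (pvE X), nq.map (pvE X)) j
        = (some d, sn, q.map (pvE X), nq.map (pvE X)) := rfl
    rw [show pvSStepA Y X g s1 day c (some d, v, q, nq) dd = (some d, v, q, nq) from rfl]
    split_ifs with hcnd
    · rw [hB]; exact ⟨rfl, h2, h3, h4, rfl, rfl, h7, h8⟩
    · exact ⟨rfl, h2, h3, h4, rfl, rfl, h7, h8⟩
  | none =>
    by_cases hb : pvBnd Y X c dd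
    · rw [if_pos (hiff.1 hb)]
      obtain ⟨b1, b2, b3, b4⟩ := hb
      have htg : pvInB Y X (c.1 + dd.1, c.2 + dd.2) := ⟨b3, b4, b1, b2⟩
      have hj : pvE X (c.1 + dd.1, c.2 + dd.2) = j := henc ⟨b1, b2, b3, b4⟩
      have hjn : j < Y.toNat * X.toNat := by rw [← hj]; exact pvE_lt Y X _ htg
      have hvt := h4 _ htg
      simp only at hvt
      rw [hj] at hvt
      dsimp only [pvSStepA, pvSwanStep]
      by_cases hseen : sn.getD j false
      · rw [if_pos hseen]
        have : ¬ (0 ≤ c.2 + dd.2 ∧ c.2 + dd.2 < X ∧ 0 ≤ c.1 + dd.1 ∧ c.1 + dd.1 < Y ∧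
            pvMGet v (c.1 + dd.1) (c.2 + dd.2) = 0) := by
          rw [hvt, if_pos hseen]; intro hcon; omega
        rw [if_neg this]
        exact ⟨rfl, h2, h3, h4, rfl, rfl, h7, h8⟩
      · rw [if_neg hseen]
        have hg1 : 0 ≤ c.2 + dd.2 ∧ c.2 + dd.2 < X ∧ 0 ≤ c.1 + dd.1 ∧ c.1 + dd.1 < Y ∧
            pvMGet v (c.1 + dd.1) (c.2 + dd.2) = 0 := by
          rw [hvt, if_neg hseen]; exact ⟨b1, b2, b3, b4, rfl⟩
        rw [if_pos hg1]
        have hyb : (c.1 + dd.1).toNat < v.length := by have := h2.1; omega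
        have hxb : (c.2 + dd.2).toNat < (v.getD (c.1 + dd.1).toNat []).length := by
          have := h2.2 (c.1 + dd.1).toNat (by omega); omega
        have hsh' : pvVShape Y X (pvMSet v (c.1 + dd.1) (c.2 + dd.2) 1) :=
          pvVShape_mset Y X v _ _ 1 b3 b1 h2
        have hlen' : (sn.set j true).length = Y.toNat * X.toNat := by simp [h3]
        have hcv' : ∀ c', pvInB Y X c' →
            pvMGet (pvMSet v (c.1 + dd.1) (c.2 + dd.2) 1) c'.1 c'.2
              = (if (sn.set j true).getD (pvE X c') false then 1 else 0) := by
          intro c' hc'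
          rw [pvMGet_mset v _ _ c'.1 c'.2 1 b3 hyb b1 hxb hc'.1 hc'.2.2.1, pvGetD_set]
          by_cases e : c' = (c.1 + dd.1, c.2 + dd.2)
          · have e2 : c'.1 = c.1 + dd.1 ∧ c'.2 = c.2 + dd.2 := by rw [e]; exact ⟨rfl, rfl⟩
            have ej : pvE X c' = j := by rw [e, hj]
            rw [if_pos e2, if_pos (show pvE X c' = j ∧ j < sn.length from
              ⟨ej, by rw [h3]; exact hjn⟩)]
            simp
          · have e2 : ¬ (c'.1 = c.1 + dd.1 ∧ c'.2 = c.2 + dd.2) := by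
              intro hcon; exact e (Prod.ext hcon.1 hcon.2)
            have ej : ¬ (pvE X c' = j) := by
              intro hcon
              exact e (pvE_inj Y X c' _ hc' htg (by rw [hcon, hj]))
            rw [if_neg e2,
                if_neg (show ¬ (pvE X c' = j ∧ j < sn.length) from by tauto)]
            exact h4 c' hc'
        have hs1eq : (c.2 + dd.2 = s1.2 ∧ c.1 + dd.1 = s1.1) ↔ j = pvE X s1 := by
          constructor
          · rintro ⟨e1, e2⟩
            rw [← hj]
            rw [show (c.1 + dd.1, c.2 + dd.2) = s1 from Prod.ext e2 e1]
          · intro e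
            have : (c.1 + dd.1, c.2 + dd.2) = s1 :=
              pvE_inj Y X _ s1 htg hs1 (by rw [hj, e])
            exact ⟨congrArg Prod.snd this, congrArg Prod.fst this⟩
        by_cases hb1 : c.2 + dd.2 = s1.2 ∧ c.1 + dd.1 = s1.1
        · rw [if_pos hb1, if_pos (hs1eq.1 hb1)]
          exact ⟨rfl, hsh', hlen', hcv', rfl, rfl, h7, h8⟩
        · rw [if_neg hb1, if_neg (fun hcon => hb1 (hs1eq.2 hcon))]
          have hx := ht _ htg
          simp only at hx
          rw [hj] at hx
          by_cases hpass : 0 ≤ M.getD j 0 ∧ M.getD j 0 ≤ day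
          · rw [if_neg (fun hcon => (hx.1 hcon) hpass), if_pos hpass]
            refine ⟨rfl, hsh', hlen', hcv', by simp [hj], rfl, ?_, h8⟩
            intro a ha
            rcases List.mem_append.1 ha with h | h
            · exact h7 a h
            · rw [List.mem_singleton.1 h]; exact htg
          · rw [if_pos (hx.2 hpass), if_neg hpass]
            refine ⟨rfl, hsh', hlen', hcv', rfl, by simp [hj], h7, ?_⟩
            intro a ha
            rcases List.mem_append.1 ha with h | h
            · exact h8 a h
            · rw [List.mem_singleton.1 h]; exact htg
    · rw [if_neg (fun hcon => hb (hiff.2 hcon))]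
      dsimp only [pvSStepA]
      rw [if_neg (by unfold pvBnd at hb; tauto)]
      exact ⟨rfl, h2, h3, h4, rfl, rfl, h7, h8⟩

theorem pvSwanCell (Y X : Int) (g : List (List String)) (M : List Int) (day : Int)
    (ht : pvTest Y X g M day) (s1 : Int × Int) (hs1 : pvInB Y X s1)
    (c : Int × Int) (hc : pvInB Y X c)
    (stA : Option Int × List (List Int) × List (Int × Int) × List (Int × Int))
    (stB : Option Int × List Bool × List Nat × List Nat)
    (hr : pvRelS Y X stA stB) :
    pvRelS Y X (pvDeltas.foldl (pvSStepA Y X g s1 day c) stA)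
      ((pvNbrs X.toNat (Y.toNat * X.toNat) (pvE X c)).foldl
        (pvSwanStep M (pvE X s1) day) stB) := by
  have hA : pvDeltas.foldl (pvSStepA Y X g s1 day c) stA
      = pvSStepA Y X g s1 day c (pvSStepA Y X g s1 day c (pvSStepA Y X g s1 day c
          (pvSStepA Y X g s1 day c stA (0, -1)) (0, 1)) (-1, 0)) (1, 0) := by
    simp only [pvDeltas, List.foldl_cons, List.foldl_nil]
  rw [hA]
  unfold pvNbrs
  rw [List.foldl_append, List.foldl_append, List.foldl_append,
      pvFoldlOpt, pvFoldlOpt, pvFoldlOpt, pvFoldlOpt]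
  have s1' := pvSwanDirStep Y X g M day ht s1 hs1 c hc (0, -1) _ _
    (pvDirL Y X c hc).1 (pvDirL Y X c hc).2 stA stB hr
  have s2 := pvSwanDirStep Y X g M day ht s1 hs1 c hc (0, 1) _ _
    (pvDirR Y X c hc).1 (pvDirR Y X c hc).2 _ _ s1'
  have s3 := pvSwanDirStep Y X g M day ht s1 hs1 c hc (-1, 0) _ _
    (pvDirU Y X c hc).1 (pvDirU Y X c hc).2 _ _ s2
  exact pvSwanDirStep Y X g M day ht s1 hs1 c hc (1, 0) _ _
    (pvDirD Y X c hc).1 (pvDirD Y X c hc).2 _ _ s3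

theorem pvSwanRun_rel (Y X : Int) (g : List (List String)) (M : List Int) (day : Int)
    (ht : pvTest Y X g M day) (s1 : Int × Int) (hs1 : pvInB Y X s1) :
    ∀ (f : Nat) (v : List (List Int)) (sn : List Bool) (qA nqA : List (Int × Int)),
    pvVShape Y X v → sn.length = Y.toNat * X.toNat →
    (∀ c, pvInB Y X c → pvMGet v c.1 c.2 = (if sn.getD (pvE X c) false then 1 else 0)) →
    (∀ a ∈ qA, pvInB Y X a) → (∀ a ∈ nqA, pvInB Y X a) →
    (pvSwanA Y X g s1 day f v qA nqA).1
      = (pvSwanRun X.toNat (Y.toNat * X.toNat) M (pvE X s1) day f sn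
          (qA.map (pvE X)) (nqA.map (pvE X))).1 ∧
    pvVShape Y X (pvSwanA Y X g s1 day f v qA nqA).2.1 ∧
    (pvSwanRun X.toNat (Y.toNat * X.toNat) M (pvE X s1) day f sn
        (qA.map (pvE X)) (nqA.map (pvE X))).2.1.length = Y.toNat * X.toNat ∧
    (∀ c, pvInB Y X c → pvMGet (pvSwanA Y X g s1 day f v qA nqA).2.1 c.1 c.2
      = (if (pvSwanRun X.toNat (Y.toNat * X.toNat) M (pvE X s1) day f sn
          (qA.map (pvE X)) (nqA.map (pvE X))).2.1.getD (pvE X c) false then 1 else 0)) ∧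
    (pvSwanRun X.toNat (Y.toNat * X.toNat) M (pvE X s1) day f sn
        (qA.map (pvE X)) (nqA.map (pvE X))).2.2
      = (pvSwanA Y X g s1 day f v qA nqA).2.2.map (pvE X) ∧
    (∀ a ∈ (pvSwanA Y X g s1 day f v qA nqA).2.2, pvInB Y X a) := by
  intro f
  induction f with
  | zero =>
    intro v sn qA nqA hsh hlen hcv hq hnq
    exact ⟨rfl, hsh, hlen, hcv, rfl, hnq⟩
  | succ f ih =>
    intro v sn qA nqA hsh hlen hcv hq hnq
    match qA with
    | [] => exact ⟨rfl, hsh, hlen, hcv, rfl, hnq⟩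
    | c :: q' =>
      have hfold := pvSwanCell Y X g M day ht s1 hs1 c (hq c List.mem_cons_self)
        (none, v, q', nqA) (none, sn, q'.map (pvE X), nqA.map (pvE X))
        ⟨rfl, hsh, hlen, hcv, rfl, rfl,
          fun a ha => hq a (List.mem_cons_of_mem _ ha), hnq⟩
      rw [show pvSwanA Y X g s1 day (f + 1) v (c :: q') nqA
          = (match (PySem.List.pyRange 0 4 1).foldl (pvSwanNbA Y X g s1 day c)
              (none, v, q', nqA) with
             | (some d, v', _, next') => (some d, v', next')
             | (none, v', q'', next') => pvSwanA Y X g s1 day f v' q'' next') from rfl]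
      rw [show (c :: q').map (pvE X) = pvE X c :: q'.map (pvE X) from rfl]
      rw [show pvSwanRun X.toNat (Y.toNat * X.toNat) M (pvE X s1) day (f + 1) sn
            (pvE X c :: q'.map (pvE X)) (nqA.map (pvE X))
          = (match (pvNbrs X.toNat (Y.toNat * X.toNat) (pvE X c)).foldl
              (pvSwanStep M (pvE X s1) day)
              (none, sn, q'.map (pvE X), nqA.map (pvE X)) with
             | (some d, sn', _, nq') => (some d, sn', nq')
             | (none, sn', q'', nq') =>
               pvSwanRun X.toNat (Y.toNat * X.toNat) M (pvE X s1) day f sn' q'' nq') from rfl]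
      rw [pvSwanNbA_fold_eq]
      rcases hA2 : pvDeltas.foldl (pvSStepA Y X g s1 day c) (none, v, q', nqA)
        with ⟨o, v', q'', nq'⟩
      rcases hB2 : (pvNbrs X.toNat (Y.toNat * X.toNat) (pvE X c)).foldl
          (pvSwanStep M (pvE X s1) day) (none, sn, q'.map (pvE X), nqA.map (pvE X))
        with ⟨o2, sn', qb'', nqb'⟩
      rw [hA2, hB2] at hfold
      obtain ⟨r1, r2, r3, r4, r5, r6, r7, r8⟩ := hfold
      simp only at r1 r2 r3 r4 r5 r6 r7 r8
      rw [← r1]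
      cases o with
      | some d => exact ⟨rfl, r2, r3, r4, r6, r8⟩
      | none =>
        rw [r5, r6]
        exact ih v' sn' q'' nq' r2 r3 r4 r7 r8


-- ---- day loop lockstep ----

theorem pvDayLoop_rel (Y X : Int) (s1 : Int × Int) (hs1 : pvInB Y X s1) (M : List Int) :
    ∀ (f : Nat) (g : List (List String)) (v : List (List Int)) (sn : List Bool)
      (sqA wqA : List (Int × Int)) (pm : List Int) (day : Int),
    0 ≤ day →
    pvGShape Y X g → pvVShape Y X v → sn.length = Y.toNat * X.toNat →
    (∀ c, pvInB Y X c → pvMGet v c.1 c.2 = (if sn.getD (pvE X c) false then 1 else 0)) →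
    pm.length = Y.toNat * X.toNat →
    (∀ c, pvInB Y X c → (pvCell g c.1 c.2 = "X" ↔ pm.getD (pvE X c) 0 = -1)) →
    M = pvMeltRun X.toNat (Y.toNat * X.toNat) (f + 1) pm (wqA.map (pvE X)) (day + 1) →
    (∀ k, pm.getD k 0 = -1 ∨ (0 ≤ pm.getD k 0 ∧ pm.getD k 0 ≤ day)) →
    (∀ a ∈ wqA, pvInB Y X a) → (∀ a ∈ sqA, pvInB Y X a) →
    pvLoopA Y X s1 f g v sqA wqA day
      = pvDayLoop X.toNat (Y.toNat * X.toNat) M (pvE X s1) f sn (sqA.map (pvE X)) day := by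
  intro f
  induction f with
  | zero => intro g v sn sqA wqA pm day _ _ _ _ _ _ _ _ _ _ _; rfl
  | succ f ih =>
    intro g v sn sqA wqA pm day hday hshg hshv hlen hcv hpmlen hcgm hM hval hwq hsq
    have ht : pvTest Y X g M day := by
      intro c hcin
      rw [hcgm c hcin]
      by_cases hpm : pm.getD (pvE X c) 0 = -1
      · rw [hM]
        rcases pvMeltRun_new X.toNat (Y.toNat * X.toNat) (f + 1 + 1) pm
            (wqA.map (pvE X)) (day + 1) (pvE X c) with h | h
        · rw [h, hpm]
          constructor
          · intro _; intro hcon; omega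
          · intro _; rfl
        · constructor
          · intro _; intro hcon; omega
          · intro _; exact hpm
      · have hmono : M.getD (pvE X c) 0 = pm.getD (pvE X c) 0 := by
          rw [hM]
          exact pvMeltRun_mono X.toNat (Y.toNat * X.toNat) (f + 1 + 1) pm
            (wqA.map (pvE X)) (day + 1) (pvE X c) hpm
        rcases hval (pvE X c) with h | h
        · exact absurd h hpm
        · rw [hmono]
          constructor
          · intro hcon; exact absurd hcon hpm
          · intro hcon; exact absurd (by omega : ¬ ¬ (0 ≤ pm.getD (pvE X c) 0 ∧
              pm.getD (pvE X c) 0 ≤ day)) (fun hcc => hcc hcon)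
    have hsw := pvSwanRun_rel Y X g M day ht s1 hs1
      (sqA.length + Y.toNat * X.toNat + 1) v sn sqA [] hshv hlen hcv hsq (by simp)
    rw [show pvLoopA Y X s1 (f + 1) g v sqA wqA day
        = (match pvSwanA Y X g s1 day (sqA.length + Y.toNat * X.toNat + 1) v sqA [] with
           | (some d, _, _) => d
           | (none, v', snq) =>
             pvLoopA Y X s1 f (pvWaterA Y X g wqA []).1 v' snq (pvWaterA Y X g wqA []).2
               (day + 1)) from rfl]
    rw [show pvDayLoop X.toNat (Y.toNat * X.toNat) M (pvE X s1) (f + 1) sn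
          (sqA.map (pvE X)) day
        = (match pvSwanRun X.toNat (Y.toNat * X.toNat) M (pvE X s1) day
            ((sqA.map (pvE X)).length + Y.toNat * X.toNat + 1) sn (sqA.map (pvE X)) [] with
           | (some d, _, _) => d
           | (none, sn', nq) =>
             pvDayLoop X.toNat (Y.toNat * X.toNat) M (pvE X s1) f sn' nq (day + 1))
          from rfl]
    rw [List.length_map] at *
    rw [show ([] : List Nat) = ([] : List (Int × Int)).map (pvE X) from rfl]
    rcases hA2 : pvSwanA Y X g s1 day (sqA.length + Y.toNat * X.toNat + 1) v sqA []
      with ⟨o, v', snqA⟩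
    rcases hB2 : pvSwanRun X.toNat (Y.toNat * X.toNat) M (pvE X s1) day
        (sqA.length + Y.toNat * X.toNat + 1) sn (sqA.map (pvE X))
        (([] : List (Int × Int)).map (pvE X)) with ⟨o2, sn', snqB⟩
    rw [hA2, hB2] at hsw
    obtain ⟨r1, r2, r3, r4, r5, r6⟩ := hsw
    simp only at r1 r2 r3 r4 r5 r6
    rw [← r1]
    cases o with
    | some d => rfl
    | none =>
      have hwrel := pvWater_layer_rel Y X (day + 1) (by omega) wqA g [] (pm, [])
        ⟨hshg, hpmlen, hcgm, rfl, by simp⟩ hwq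
      have hlayer : pvMeltLayer X.toNat (Y.toNat * X.toNat) (day + 1) pm (wqA.map (pvE X))
          = wqA.foldl (fun st c =>
              (pvNbrs X.toNat (Y.toNat * X.toNat) (pvE X c)).foldl
                (pvMeltStep (day + 1)) st) (pm, []) := by
        unfold pvMeltLayer
        rw [List.foldl_map]
      obtain ⟨w1, w2, w3, w4, w5⟩ := hwrel
      rw [← hlayer] at w2 w3 w4
      have hM' : M = pvMeltRun X.toNat (Y.toNat * X.toNat) (f + 1)
          (pvMeltLayer X.toNat (Y.toNat * X.toNat) (day + 1) pm (wqA.map (pvE X))).1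
          (pvMeltLayer X.toNat (Y.toNat * X.toNat) (day + 1) pm (wqA.map (pvE X))).2
          (day + 1 + 1) := by
        rw [hM, pvMeltRun_step]
      have hval' : ∀ k, (pvMeltLayer X.toNat (Y.toNat * X.toNat) (day + 1) pm
          (wqA.map (pvE X))).1.getD k 0 = -1 ∨
          (0 ≤ (pvMeltLayer X.toNat (Y.toNat * X.toNat) (day + 1) pm
            (wqA.map (pvE X))).1.getD k 0 ∧
           (pvMeltLayer X.toNat (Y.toNat * X.toNat) (day + 1) pm
            (wqA.map (pvE X))).1.getD k 0 ≤ day + 1) := by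
        intro k
        rcases pvMeltLayer_new X.toNat (Y.toNat * X.toNat) (day + 1) pm
            (wqA.map (pvE X)) k with h | h
        · rw [h]
          rcases hval k with h2 | h2
          · exact Or.inl h2
          · exact Or.inr ⟨h2.1, by omega⟩
        · rw [h]; exact Or.inr ⟨by omega, by omega⟩
      rw [r5]
      refine ih (pvWaterA Y X g wqA []).1 v' sn' snqA
        (pvWaterA Y X g wqA []).2
        (pvMeltLayer X.toNat (Y.toNat * X.toNat) (day + 1) pm (wqA.map (pvE X))).1
        (day + 1) (by omega) w1 r2 r3 r4 w2 w3 ?_ hval' ?_ r6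
      · rw [hM', w4]
      · exact w5


-- ---- scan lemmas ----

theorem pvFold_append_mem {α β : Type} (l : List α) (P : α → Prop) [DecidablePred P]
    (f : α → β) (acc : List β) :
    l.foldl (fun acc x => if P x then acc ++ [f x] else acc) acc
      = acc ++ (l.filter (fun x => decide (P x))).map f := by
  induction l generalizing acc with
  | nil => simp
  | cons a l ih =>
    by_cases h : P a
    · simp [List.foldl_cons, h, ih, List.filter_cons]
    · simp [List.foldl_cons, h, ih, List.filter_cons]

theorem pvScan_shape (Y X : Int) (P : Int → Int → Prop)
    [∀ y x, Decidable (P y x)] :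
    (PySem.List.pyRange 0 Y 1).foldl (fun acc y =>
        (PySem.List.pyRange 0 X 1).foldl (fun acc x =>
          if P y x then acc ++ [(y, x)] else acc) acc) []
      = (PySem.List.pyRange 0 Y 1).flatMap (fun y =>
          ((PySem.List.pyRange 0 X 1).filter (fun x => decide (P y x))).map
            (fun x => (y, x))) := by
  calc (PySem.List.pyRange 0 Y 1).foldl (fun acc y =>
        (PySem.List.pyRange 0 X 1).foldl (fun acc x =>
          if P y x then acc ++ [(y, x)] else acc) acc) []
      = (PySem.List.pyRange 0 Y 1).foldl (fun acc y =>
          acc ++ ((PySem.List.pyRange 0 X 1).filter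
            (fun x => decide (P y x))).map (fun x => ((y : Int), x))) [] := by
        exact PySem.List.foldl_congr_mem _ _ _ _ (fun acc y _ => pvFold_append_mem _ _ _ _)
    _ = _ := by rw [PySem.List.foldl_append_eq_flatMap]; simp

theorem pvSwanScanA_eq (Y X : Int) (grid : List (List String)) :
    pvSwanScanA Y X grid
      = (PySem.List.pyRange 0 Y 1).flatMap (fun y =>
          ((PySem.List.pyRange 0 X 1).filter
            (fun x => decide (pvCell grid y x = "L"))).map (fun x => (y, x))) := by
  unfold pvSwanScanA
  exact pvScan_shape Y X (fun y x => pvCell grid y x = "L")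

theorem pvWaterScanA_eq (Y X : Int) (grid : List (List String)) :
    pvWaterScanA Y X grid
      = (PySem.List.pyRange 0 Y 1).flatMap (fun y =>
          ((PySem.List.pyRange 0 X 1).filter
            (fun x => decide (pvCell grid y x ≠ "X"))).map (fun x => (y, x))) := by
  unfold pvWaterScanA
  exact pvScan_shape Y X (fun y x => pvCell grid y x ≠ "X")

theorem pvWaterScanA_mem (Y X : Int) (grid : List (List String)) (c : Int × Int) :
    c ∈ pvWaterScanA Y X grid ↔ pvInB Y X c ∧ pvCell grid c.1 c.2 ≠ "X" := by
  obtain ⟨cy, cx⟩ := c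
  rw [pvWaterScanA_eq]
  simp only [List.mem_flatMap, List.mem_filter, List.mem_map,
    PySem.List.mem_pyRange_one, decide_eq_true_eq, Prod.mk.injEq, pvInB]
  constructor
  · rintro ⟨y, ⟨hy1, hy2⟩, x, ⟨⟨⟨hx1, hx2⟩, hP⟩, e1, e2⟩⟩
    subst e1; subst e2; exact ⟨⟨hy1, hy2, hx1, hx2⟩, hP⟩
  · rintro ⟨⟨h1, h2, h3, h4⟩, hP⟩
    exact ⟨cy, ⟨h1, h2⟩, cx, ⟨⟨⟨h3, h4⟩, hP⟩, rfl, rfl⟩⟩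

theorem pvSwanScanA_mem (Y X : Int) (grid : List (List String)) (c : Int × Int)
    (h : c ∈ pvSwanScanA Y X grid) : pvInB Y X c ∧ pvCell grid c.1 c.2 = "L" := by
  obtain ⟨cy, cx⟩ := c
  rw [pvSwanScanA_eq] at h
  simp only [List.mem_flatMap, List.mem_filter, List.mem_map,
    PySem.List.mem_pyRange_one, decide_eq_true_eq, Prod.mk.injEq] at h
  obtain ⟨y, ⟨hy1, hy2⟩, x, ⟨⟨⟨hx1, hx2⟩, hP⟩, e1, e2⟩⟩ := h
  subst e1; subst e2
  exact ⟨⟨hy1, hy2, hx1, hx2⟩, hP⟩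

theorem pvFilterRangeCount (r : List String) :
    ∀ n : Nat, n ≤ r.length →
    ((List.range n).filter (fun i => decide (r.getD i "" = "L"))).length
      = (r.take n).count "L" := by
  intro n
  induction n with
  | zero => intro _; rfl
  | succ n ih =>
    intro h
    have hn : n < r.length := by omega
    have hget : r[n]? = some r[n] := List.getElem?_eq_getElem hn
    have hgd : r.getD n "" = r[n] := by rw [List.getD, hget]; rfl
    rw [List.range_succ, List.filter_append, List.length_append, ih (by omega),
        List.take_succ, List.count_append, hget]
    congr 1
    have hsing : List.filter (fun i => decide (r.getD i "" = "L")) [n]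
        = if r[n] = "L" then [n] else [] := by
      by_cases e : r[n] = "L" <;> simp [List.filter, hget, e]
    by_cases e : r[n] = "L"
    · rw [hsing, if_pos e]; simp [e]
    · rw [hsing, if_neg e]
      simp [List.count_cons, e]

theorem pvSumTake (l : List (List String)) (F : List String → Nat) :
    ∀ n : Nat, n ≤ l.length →
    ((List.range n).map (fun i => F (l.getD i []))).sum = ((l.take n).map F).sum := by
  intro n
  induction n with
  | zero => intro _; rfl
  | succ n ih =>
    intro h
    have hn : n < l.length := by omega
    have hgd : l.getD n [] = l[n] := by rw [List.getD, List.getElem?_eq_getElem hn]; rfl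
    rw [List.range_succ, List.map_append, List.sum_append, ih (by omega),
        List.take_succ, List.getElem?_eq_getElem hn, List.map_append, List.sum_append]
    simp only [Option.toList_some, List.map_cons, List.map_nil, List.sum_cons, List.sum_nil,
      add_zero, hgd]

theorem pvSwanScanA_len (Y X : Int) (grid : List (List String))
    (h1 : 0 ≤ Y) (h2 : Y ≤ (grid.length : Int))
    (h3 : ∀ r ∈ grid.take Y.toNat, X ≤ (r.length : Int)) :
    (pvSwanScanA Y X grid).length =
      ((grid.take Y.toNat).map (fun r => (r.take X.toNat).count "L")).sum := by
  rw [pvSwanScanA_eq, List.length_flatMap]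
  have hrow : ∀ y : Int, 0 ≤ y → y < Y →
      (((PySem.List.pyRange 0 X 1).filter
        (fun x => decide (pvCell grid y x = "L"))).map (fun x => ((y : Int), x))).length
      = ((grid.getD y.toNat []).take X.toNat).count "L" := by
    intro y hy0 hyY
    have hmem : grid.getD y.toNat [] ∈ grid.take Y.toNat := by
      have hyl : y.toNat < grid.length := by omega
      have hgd : grid.getD y.toNat [] = grid[y.toNat] := by
        rw [List.getD, List.getElem?_eq_getElem hyl]; rfl
      rw [hgd]
      have hyl2 : y.toNat < (grid.take Y.toNat).length := by
        rw [List.length_take]; omega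
      have heq : (grid.take Y.toNat)[y.toNat] = grid[y.toNat] := List.getElem_take
      rw [← heq]
      exact List.getElem_mem hyl2
    have hXr : X.toNat ≤ (grid.getD y.toNat []).length := by
      have := h3 _ hmem; omega
    rw [List.length_map, PySem.List.pyRange_one, List.filter_map, List.length_map]
    have hpred : ∀ k, k ∈ List.range (X - 0).toNat →
        ((fun x => decide (pvCell grid y x = "L")) ∘ (fun k : Nat => (0 : Int) + k)) k
        = decide ((grid.getD y.toNat []).getD k "" = "L") := by
      intro k _
      have hc : pvCell grid y ((0 : Int) + k) = (grid.getD y.toNat []).getD k "" := by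
        unfold pvCell
        rw [pvGetD_nonneg _ _ _ hy0, pvGetD_nonneg _ _ _ (by omega : (0:Int) ≤ 0 + k)]
        congr 1
        omega
      simp only [Function.comp_apply]
      rw [hc]
    rw [List.filter_congr hpred]
    rw [show ((X : Int) - 0).toNat = X.toNat from by omega]
    exact pvFilterRangeCount _ X.toNat hXr
  have hmapeq : List.map (fun a => (List.map (fun x => (a, x))
        (List.filter (fun x => decide (pvCell grid a x = "L"))
          (PySem.List.pyRange 0 X 1))).length) (PySem.List.pyRange 0 Y 1)
      = List.map (fun a : Int => ((grid.getD a.toNat []).take X.toNat).count "L")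
        (PySem.List.pyRange 0 Y 1) := by
    refine List.map_congr_left ?_
    intro y hy
    rw [PySem.List.mem_pyRange_one] at hy
    exact hrow y hy.1 hy.2
  rw [hmapeq, PySem.List.pyRange_one, List.map_map]
  rw [show ((Y : Int) - 0).toNat = Y.toNat from by omega]
  have hfin : ∀ j ∈ List.range Y.toNat,
      ((fun a : Int => ((grid.getD a.toNat []).take X.toNat).count "L")
        ∘ (fun k : Nat => (0 : Int) + k)) j
      = (fun i => ((grid.getD i []).take X.toNat).count "L") j := by
    intro j _
    simp only [Function.comp_apply]
    rw [show ((0 : Int) + j).toNat = j from by omega]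
  rw [List.map_congr_left hfin]
  exact pvSumTake grid (fun r => (r.take X.toNat).count "L") Y.toNat (by omega)

-- ---- B's flat scan characterised ----

def pvScanStepF (grid : List (List String)) (X' : Nat)
    (st : List Int × List Nat × List Nat) (i : Nat) : List Int × List Nat × List Nat :=
  let cell := pvCellI grid X' i
  let st1 := if cell ≠ "X" then (st.1.set i 0, st.2.1 ++ [i], st.2.2) else st
  if cell = "L" then (st1.1, st1.2.1, st1.2.2 ++ [i]) else st1

theorem pvScanF_eq_fold (Y X : Int) (grid : List (List String)) :
    pvScanF Y X grid = (List.range (Y.toNat * X.toNat)).foldl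
      (pvScanStepF grid X.toNat)
      (List.replicate (Y.toNat * X.toNat) (-1), [], []) := rfl

theorem pvScanStepF_fst (grid : List (List String)) (X' : Nat)
    (st : List Int × List Nat × List Nat) (i : Nat) :
    (pvScanStepF grid X' st i).1
      = (if pvCellI grid X' i ≠ "X" then st.1.set i 0 else st.1) := by
  unfold pvScanStepF
  by_cases h1 : pvCellI grid X' i = "X"
  · have h2 : ¬ pvCellI grid X' i = "L" := by rw [h1]; decide
    simp [h1, h2]
  · by_cases h2 : pvCellI grid X' i = "L" <;> simp [h1, h2]

theorem pvScanStepF_q (grid : List (List String)) (X' : Nat)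
    (st : List Int × List Nat × List Nat) (i : Nat) :
    (pvScanStepF grid X' st i).2.1
      = (if pvCellI grid X' i ≠ "X" then st.2.1 ++ [i] else st.2.1) := by
  unfold pvScanStepF
  by_cases h1 : pvCellI grid X' i = "X"
  · have h2 : ¬ pvCellI grid X' i = "L" := by rw [h1]; decide
    simp [h1, h2]
  · by_cases h2 : pvCellI grid X' i = "L" <;> simp [h1, h2]

theorem pvScanStepF_s (grid : List (List String)) (X' : Nat)
    (st : List Int × List Nat × List Nat) (i : Nat) :
    (pvScanStepF grid X' st i).2.2
      = (if pvCellI grid X' i = "L" then st.2.2 ++ [i] else st.2.2) := by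
  unfold pvScanStepF
  by_cases h1 : pvCellI grid X' i = "X"
  · have h2 : ¬ pvCellI grid X' i = "L" := by rw [h1]; decide
    simp [h1, h2]
  · by_cases h2 : pvCellI grid X' i = "L" <;> simp [h1, h2]

theorem pvScanF_aux (grid : List (List String)) (X' : Nat) (l : List Nat) :
    ∀ st : List Int × List Nat × List Nat,
    (l.foldl (pvScanStepF grid X') st).1.length = st.1.length ∧
    (∀ k, (l.foldl (pvScanStepF grid X') st).1.getD k 0
        = if k ∈ l ∧ pvCellI grid X' k ≠ "X" ∧ k < st.1.length then 0
          else st.1.getD k 0) ∧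
    (l.foldl (pvScanStepF grid X') st).2.1
      = l.foldl (fun acc i => if pvCellI grid X' i ≠ "X" then acc ++ [i] else acc) st.2.1 ∧
    (l.foldl (pvScanStepF grid X') st).2.2
      = l.foldl (fun acc i => if pvCellI grid X' i = "L" then acc ++ [i] else acc) st.2.2 := by
  induction l with
  | nil =>
    intro st
    refine ⟨rfl, ?_, rfl, rfl⟩
    intro k
    rw [List.foldl_nil, if_neg (by simp)]
  | cons i l ih =>
    intro st
    simp only [List.foldl_cons]
    obtain ⟨g1, g2, g3, g4⟩ := ih (pvScanStepF grid X' st i)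
    have hlen : (pvScanStepF grid X' st i).1.length = st.1.length := by
      rw [pvScanStepF_fst]
      split_ifs <;> simp
    refine ⟨by rw [g1, hlen], ?_, ?_, ?_⟩
    · intro k
      rw [g2 k, hlen, pvScanStepF_fst]
      by_cases hk : k ∈ l ∧ pvCellI grid X' k ≠ "X" ∧ k < st.1.length
      · rw [if_pos hk, if_pos ⟨List.mem_cons_of_mem _ hk.1, hk.2⟩]
      · rw [if_neg hk]
        by_cases hx : pvCellI grid X' i ≠ "X"
        · rw [if_pos hx, pvGetD_set]
          by_cases he : k = i ∧ i < st.1.length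
          · rw [if_pos he, if_pos ⟨by rw [he.1]; exact List.mem_cons_self,
              by rw [he.1]; exact hx, by rw [he.1] at *; exact he.2⟩]
          · rw [if_neg he, if_neg ?_]
            intro hcon
            rcases List.mem_cons.1 hcon.1 with h | h
            · exact he ⟨h, by rw [← h]; exact hcon.2.2⟩
            · exact hk ⟨h, hcon.2⟩
        · rw [if_neg hx, if_neg ?_]
          intro hcon
          rcases List.mem_cons.1 hcon.1 with h | h
          · rw [h] at hcon; exact hx hcon.2.1
          · exact hk ⟨h, hcon.2⟩
    · rw [g3, pvScanStepF_q]
    · rw [g4, pvScanStepF_s]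

-- ---- flattening the 2-D ranges ----

theorem pvFlatDiv (k j X' : Nat) (h : j < X') : (k * X' + j) / X' = k := by
  rw [Nat.mul_comm, Nat.mul_add_div (by omega), Nat.div_eq_of_lt h]
  omega

theorem pvFlatMod (k j X' : Nat) (h : j < X') : (k * X' + j) % X' = j := by
  rw [Nat.add_comm, Nat.add_mul_mod_self_right]
  exact Nat.mod_eq_of_lt h

theorem pvRangeMul (a b : Nat) :
    List.range (a * b) = (List.range a).flatMap (fun y => (List.range b).map
      (fun x => y * b + x)) := by
  induction a with
  | zero => simp
  | succ a ih =>
    rw [Nat.succ_mul, List.range_add, ih, List.range_succ, List.flatMap_append]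
    simp

theorem pvFilterFlatMap {α β : Type} (l : List α) (f : α → List β) (p : β → Bool) :
    (l.flatMap f).filter p = l.flatMap (fun a => (f a).filter p) := by
  induction l with
  | nil => rfl
  | cons a l ih => simp [List.flatMap_cons, List.filter_append, ih]

theorem pvFlatMapCongr {α β : Type} (l : List α) (f g : α → List β)
    (h : ∀ a ∈ l, f a = g a) : l.flatMap f = l.flatMap g := by
  induction l with
  | nil => rfl
  | cons a l ih =>
    simp only [List.flatMap_cons]
    rw [h a List.mem_cons_self, ih (fun a ha => h a (List.mem_cons_of_mem _ ha))]

theorem pvE_cast (X : Int) (k j : Nat) : pvE X ((k : Int), (j : Int)) = k * X.toNat + j := by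
  unfold pvE
  simp

theorem pvCellI_eq (grid : List (List String)) (X : Int) (i : Nat) :
    pvCellI grid X.toNat i
      = pvCell grid ((i / X.toNat : Nat) : Int) ((i % X.toNat : Nat) : Int) := by
  unfold pvCellI pvCell
  rw [pvGetD_nonneg _ _ _ (by positivity), pvGetD_nonneg _ _ _ (by positivity)]
  rw [Int.toNat_natCast, Int.toNat_natCast]

theorem pvScan_flat (Y X : Int) (P : Int → Int → Prop) [∀ y x, Decidable (P y x)] :
    (((PySem.List.pyRange 0 Y 1).flatMap (fun y =>
        ((PySem.List.pyRange 0 X 1).filter (fun x => decide (P y x))).map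
          (fun x => ((y, x) : Int × Int)))).map (pvE X))
      = (List.range (Y.toNat * X.toNat)).filter
          (fun i => decide (P ((i / X.toNat : Nat) : Int) ((i % X.toNat : Nat) : Int))) := by
  rw [List.map_flatMap]
  rw [PySem.List.pyRange_one 0 Y, PySem.List.pyRange_one 0 X]
  simp only [sub_zero, zero_add]
  rw [List.flatMap_map]
  rw [pvRangeMul Y.toNat X.toNat, pvFilterFlatMap]
  refine pvFlatMapCongr _ _ _ ?_
  intro k hk
  rw [List.filter_map, List.map_map, List.filter_map]
  have hpred : ∀ j ∈ List.range X.toNat,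
      ((fun i => decide (P ((i / X.toNat : Nat) : Int) ((i % X.toNat : Nat) : Int)))
        ∘ (fun x => k * X.toNat + x)) j
      = ((fun x => decide (P (k : Int) x)) ∘ (fun j : Nat => (j : Int))) j := by
    intro j hj
    rw [List.mem_range] at hj
    simp only [Function.comp_apply]
    rw [pvFlatDiv k j X.toNat hj, pvFlatMod k j X.toNat hj]
  rw [List.filter_congr hpred, List.map_map]
  refine List.map_congr_left ?_
  intro j hj
  simp only [Function.comp_apply]
  exact pvE_cast X k j

-- the three facts about B's scan, stated against A's scans
theorem pvFoldFilterId (l : List Nat) (P : Nat → Prop) [DecidablePred P] :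
    l.foldl (fun acc i => if P i then acc ++ [i] else acc) ([] : List Nat)
      = l.filter (fun i => decide (P i)) := by
  have h := pvFold_append_mem l P id ([] : List Nat)
  simpa using h

theorem pvScanF_swans (Y X : Int) (grid : List (List String)) :
    (pvScanF Y X grid).2.2 = (pvSwanScanA Y X grid).map (pvE X) := by
  rw [pvScanF_eq_fold]
  rw [(pvScanF_aux grid X.toNat (List.range (Y.toNat * X.toNat)) _).2.2.2]
  show (List.range (Y.toNat * X.toNat)).foldl
      (fun acc i => if pvCellI grid X.toNat i = "L" then acc ++ [i] else acc) [] = _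
  rw [pvFoldFilterId (List.range (Y.toNat * X.toNat))
      (fun i => pvCellI grid X.toNat i = "L")]
  rw [pvSwanScanA_eq, pvScan_flat Y X (fun y x => pvCell grid y x = "L")]
  refine List.filter_congr ?_
  intro i _
  rw [pvCellI_eq]

theorem pvScanF_frontier (Y X : Int) (grid : List (List String)) :
    (pvScanF Y X grid).2.1 = (pvWaterScanA Y X grid).map (pvE X) := by
  rw [pvScanF_eq_fold]
  rw [(pvScanF_aux grid X.toNat (List.range (Y.toNat * X.toNat)) _).2.2.1]
  show (List.range (Y.toNat * X.toNat)).foldl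
      (fun acc i => if pvCellI grid X.toNat i ≠ "X" then acc ++ [i] else acc) [] = _
  rw [pvFoldFilterId (List.range (Y.toNat * X.toNat))
      (fun i => pvCellI grid X.toNat i ≠ "X")]
  rw [pvWaterScanA_eq, pvScan_flat Y X (fun y x => pvCell grid y x ≠ "X")]
  refine List.filter_congr ?_
  intro i _
  rw [pvCellI_eq]

theorem pvScanF_melt_len (Y X : Int) (grid : List (List String)) :
    (pvScanF Y X grid).1.length = Y.toNat * X.toNat := by
  rw [pvScanF_eq_fold, (pvScanF_aux grid X.toNat _ _).1, List.length_replicate]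

theorem pvReplicateGetD (n k : Nat) :
    (List.replicate n (-1 : Int)).getD k 0 = if k < n then -1 else 0 := by
  rw [List.getD]
  by_cases h : k < n
  · rw [List.getElem?_eq_getElem (by simpa using h)]
    simp [h]
  · rw [List.getElem?_eq_none (by simpa using h)]
    simp [h]

theorem pvScanF_melt_getD (Y X : Int) (grid : List (List String)) (k : Nat) :
    (pvScanF Y X grid).1.getD k 0
      = if k < Y.toNat * X.toNat then
          (if pvCellI grid X.toNat k ≠ "X" then 0 else -1)
        else 0 := by
  rw [pvScanF_eq_fold, (pvScanF_aux grid X.toNat _ _).2.1 k]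
  rw [List.length_replicate]
  by_cases hk : k < Y.toNat * X.toNat
  · by_cases hx : pvCellI grid X.toNat k ≠ "X"
    · rw [if_pos ⟨List.mem_range.2 hk, hx, hk⟩, if_pos hk, if_pos hx]
    · rw [if_neg (by tauto), pvReplicateGetD, if_pos hk, if_pos hk, if_neg hx]
  · rw [if_neg (by
      intro hcon
      exact hk (List.mem_range.1 hcon.1)), pvReplicateGetD, if_neg hk, if_neg hk]

theorem pvCellI_e (Y X : Int) (grid : List (List String)) (c : Int × Int)
    (h : pvInB Y X c) :
    pvCellI grid X.toNat (pvE X c) = pvCell grid c.1 c.2 := by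
  obtain ⟨h1, h2, h3, h4⟩ := h
  rw [pvCellI_eq]
  rw [pvE_div X c (by omega) (by omega), pvE_mod X c (by omega)]
  rw [show ((c.1.toNat : Int)) = c.1 from by omega,
      show ((c.2.toNat : Int)) = c.2 from by omega]

-- ===== VERDICT (by name: the statement is the Claim_ definition above) =====
theorem solve_spec : Claim_equal_solve := by
  intro Y X grid _ hpre
  obtain ⟨hY, hX, hlen, hrow, hcnt⟩ := hpre
  unfold Spec_solve
  have hlen2 : 2 ≤ (pvSwanScanA Y X grid).length := by
    rw [pvSwanScanA_len Y X grid (by omega) hlen hrow]; exact hcnt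
  rcases hscan : pvSwanScanA Y X grid with _ | ⟨s0, rest⟩
  · rw [hscan] at hlen2; simp at hlen2
  rcases rest with _ | ⟨s1, rest'⟩
  · rw [hscan] at hlen2; simp at hlen2
  have hs0mem : s0 ∈ pvSwanScanA Y X grid := by rw [hscan]; exact List.mem_cons_self
  have hs1mem : s1 ∈ pvSwanScanA Y X grid := by
    rw [hscan]; exact List.mem_cons_of_mem _ List.mem_cons_self
  have hs0in : pvInB Y X s0 := (pvSwanScanA_mem Y X grid s0 hs0mem).1
  have hs1in : pvInB Y X s1 := (pvSwanScanA_mem Y X grid s1 hs1mem).1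
  -- grid shape from Pre_
  have hmemtake : ∀ i : Nat, i < Y.toNat → grid.getD i [] ∈ grid.take Y.toNat := by
    intro i hi
    have hyl : i < grid.length := by omega
    have hgd : grid.getD i [] = grid[i] := by
      rw [List.getD, List.getElem?_eq_getElem hyl]; rfl
    rw [hgd]
    have hyl2 : i < (grid.take Y.toNat).length := by rw [List.length_take]; omega
    have heq : (grid.take Y.toNat)[i] = grid[i] := List.getElem_take
    rw [← heq]
    exact List.getElem_mem hyl2
  have hshg : pvGShape Y X grid := by
    refine ⟨by omega, ?_⟩
    intro i hi
    have := hrow _ (hmemtake i hi)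
    omega
  -- visited-matrix shape and initial coupling with B's flat seen array
  have hv0row : ∀ i : Nat, i < Y.toNat →
      (pvVisited0 Y X).getD i [] = List.replicate X.toNat 0 := by
    intro i hi
    have hlt : i < (PySem.List.pyRange 0 Y 1).length := by
      rw [PySem.List.pyRange_one, List.length_map, List.length_range]; omega
    rw [List.getD, pvVisited0, List.getElem?_map, List.getElem?_eq_getElem hlt]
    rfl
  have hv0shape : pvVShape Y X (pvVisited0 Y X) := by
    constructor
    · rw [pvVisited0, List.length_map, PySem.List.pyRange_one, List.length_map,
        List.length_range]
      omega
    · intro i hi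
      rw [hv0row i hi, List.length_replicate]
  have hv0get : ∀ cc : Int × Int, pvInB Y X cc → pvMGet (pvVisited0 Y X) cc.1 cc.2 = 0 := by
    intro cc hcc
    unfold pvMGet
    rw [pvGetD_nonneg _ _ _ hcc.1, pvGetD_nonneg _ _ _ hcc.2.2.1]
    rw [hv0row cc.1.toNat (by have := hcc.2.1; have := hcc.1; omega)]
    rcases Nat.lt_or_ge cc.2.toNat X.toNat with h | h
    · rw [List.getD, List.getElem?_eq_getElem (by rw [List.length_replicate]; omega)]
      simp
    · rw [List.getD, List.getElem?_eq_none (by rw [List.length_replicate]; omega)]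
      rfl
  have hs0y : s0.1.toNat < (pvVisited0 Y X).length := by
    rw [hv0shape.1]; have := hs0in.1; have := hs0in.2.1; omega
  have hs0x : s0.2.toNat < ((pvVisited0 Y X).getD s0.1.toNat []).length := by
    rw [hv0shape.2 s0.1.toNat (by have := hs0in.2.1; omega)]
    have := hs0in.2.2.1; have := hs0in.2.2.2; omega
  have hrepF : ∀ k, (List.replicate (Y.toNat * X.toNat) false).getD k false = false := by
    intro k
    rcases Nat.lt_or_ge k (Y.toNat * X.toNat) with h | h
    · rw [List.getD, List.getElem?_eq_getElem (by simpa using h)]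
      simp
    · rw [List.getD, List.getElem?_eq_none (by simpa using h)]
      rfl
  have hsn0len : ((List.replicate (Y.toNat * X.toNat) false).set (pvE X s0) true).length
      = Y.toNat * X.toNat := by simp
  have hcv0 : ∀ c, pvInB Y X c →
      pvMGet (pvMSet (pvVisited0 Y X) s0.1 s0.2 1) c.1 c.2
        = (if ((List.replicate (Y.toNat * X.toNat) false).set (pvE X s0) true).getD
            (pvE X c) false then 1 else 0) := by
    intro c hc
    rw [pvMGet_mset _ _ _ _ _ _ hs0in.1 hs0y hs0in.2.2.1 hs0x hc.1 hc.2.2.1, pvGetD_set]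
    by_cases e : c = s0
    · rw [if_pos ⟨by rw [e], by rw [e]⟩,
          if_pos (show pvE X c = pvE X s0 ∧
              pvE X s0 < (List.replicate (Y.toNat * X.toNat) false).length from
            ⟨by rw [e], by rw [List.length_replicate]; exact pvE_lt Y X s0 hs0in⟩)]
      simp
    · rw [if_neg (fun hcon => e (Prod.ext hcon.1 hcon.2)),
          if_neg (show ¬ (pvE X c = pvE X s0 ∧
              pvE X s0 < (List.replicate (Y.toNat * X.toNat) false).length) from
            fun hcon => e (pvE_inj Y X c s0 hc hs0in hcon.1))]
      rw [hrepF, hv0get c hc]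
      simp
  -- initial grid/melt-table coupling
  have hpmlen : (pvScanF Y X grid).1.length = Y.toNat * X.toNat :=
    pvScanF_melt_len Y X grid
  have hcgm0 : ∀ c, pvInB Y X c →
      (pvCell grid c.1 c.2 = "X" ↔ (pvScanF Y X grid).1.getD (pvE X c) 0 = -1) := by
    intro c hc
    rw [pvScanF_melt_getD, if_pos (pvE_lt Y X c hc), pvCellI_e Y X grid c hc]
    by_cases hx : pvCell grid c.1 c.2 = "X"
    · rw [if_neg (by rw [hx]; simp)]
      simp [hx]
    · rw [if_pos hx]
      constructor
      · intro hcon; exact absurd hcon hx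
      · intro hcon; exact absurd hcon (by decide)
  have hval0 : ∀ k, (pvScanF Y X grid).1.getD k 0 = -1 ∨
      (0 ≤ (pvScanF Y X grid).1.getD k 0 ∧ (pvScanF Y X grid).1.getD k 0 ≤ 0) := by
    intro k
    rw [pvScanF_melt_getD]
    split_ifs
    · exact Or.inr ⟨le_refl 0, le_refl 0⟩
    · exact Or.inl rfl
    · exact Or.inr ⟨le_refl 0, le_refl 0⟩
  -- reduce both programs to their day loops
  have hA : solve Y X grid
      = pvLoopA Y X s1 (Y.toNat * X.toNat + 1) grid
          (pvMSet (pvVisited0 Y X) s0.1 s0.2 1) [s0] (pvWaterScanA Y X grid) 0 := by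
    unfold solve
    rw [hscan]
  have hB : solve_alt Y X grid
      = pvDayLoop X.toNat (Y.toNat * X.toNat)
          (pvMeltRun X.toNat (Y.toNat * X.toNat) (Y.toNat * X.toNat + 2)
            (pvScanF Y X grid).1 (pvScanF Y X grid).2.1 1)
          (pvE X s1) (Y.toNat * X.toNat + 1)
          ((List.replicate (Y.toNat * X.toNat) false).set (pvE X s0) true) [pvE X s0] 0 := by
    simp only [solve_alt]
    rw [pvScanF_swans, hscan]
    simp [List.getD]
  rw [hA, hB]
  have hfin := pvDayLoop_rel Y X s1 hs1in
    (pvMeltRun X.toNat (Y.toNat * X.toNat) (Y.toNat * X.toNat + 2)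
      (pvScanF Y X grid).1 (pvScanF Y X grid).2.1 1)
    (Y.toNat * X.toNat + 1) grid (pvMSet (pvVisited0 Y X) s0.1 s0.2 1)
    ((List.replicate (Y.toNat * X.toNat) false).set (pvE X s0) true)
    [s0] (pvWaterScanA Y X grid) (pvScanF Y X grid).1 0
    (le_refl 0) hshg
    (pvVShape_mset Y X (pvVisited0 Y X) s0.1 s0.2 1 hs0in.1 hs0in.2.2.1 hv0shape)
    hsn0len hcv0 hpmlen hcgm0
    (by rw [← pvScanF_frontier]; norm_num)
    hval0
    (fun a ha => ((pvWaterScanA_mem Y X grid a).1 ha).1)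
    (by
      intro a ha
      rw [List.mem_singleton.1 ha]
      exact hs0in)
  rw [hfin]
  rfl
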